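/-
  THE FLOOR CLAUSES OF `VorbisOK` (design/INVARIANTS.md §3.3: FL1–FL10, FY1; §6: XL, PID) AS LEAN PREDICATES, with the
  lemmas the machine-level proofs of the floor code need. Source of the design: design/I3.md, corrected by
  design/DECISIONS.md (D-6 / O-2: qsort promises RECORD-PRESERVATION only, so FL9 is derived from PID; D-10 / FIX 11:
  `inverse_db_table[ly & 255]`, so NO fact about the contents of `finalY` appears anywhere below).
  Worked examples of every item: Vorbis/FloorTest.lean.   `import Vorbis.Floor`, `open X86 X86.User Asan Vorbis`.

  THE SHARED VOCABULARY is Vorbis/Blocks.lean (read its header first): `Site Live a n` (what every USE lemma returns: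
  `s.acc hc`, `s.acc_addr hc`, `s.acc_range hc`, `s.has hc hL`, `s.inside hc`, `s.inLive`), `Blk : Block → Prop` ("is an
  allocated block": the FIRST parameter of every structure with a SHAPE clause) with its laws `BlkOK Blk` (in the data space,
  equal or disjoint) and `BlkLive Blk Live` (allocated ⇒ live: asked ONLY by USE lemmas, as their first hypothesis `hL`),
  `B.Kept mem mem'` (a block whose content is read survives), `ObjEq ws mem p mem' f` with its instances `ObjSame`, `DecodeSame`,
  `Copied`, and `objBlock f` (the 1808 bytes of `*f`). NOTHING below takes the live set except the USE lemmas; nothing takes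
  `Covers`.

  NOTATION.  `f` the decoder object, `g` one floor = `stb_vorbis.floor_config_at mem f i` (`floor_config + 1596 * i`, read
  as `Floor1`), `cbc` = `stb_vorbis.codebook_count mem f`. Indices are `Nat`; they are compared with the `int` fields
  (`floor_count`, `values`, `channels`) as `(i : Int) < …`, which is what a signed loop test gives.
  Every USE lemma takes the address as a free `a` plus an equation `ha : a = g + Off.… + …` (LAST), to be closed by
  `(by simp only [voff]; omega)` (or `rfl`): so it fits whatever shape the stepper left (`g + j * 2 + 338`,
  `g + (k + 8 * c + 40) * 2 + 2`). CAREFUL: `&&&` binds weaker than `+`; write `(x &&& m) + …`.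

  1. PURE ARITHMETIC.  `sumTo` (the Σ of FL8) with `sumTo_mono`, `sumTo_le_mul`, `sumTo_congr`, `values_le_250`,
       `offset_lt_values`, `xlist_store_le_249`; `mask_lt`, `two_pow_le_8`, `two_pow_le_32768`; `neighbors_post` (the post of
       `neighbors` + XL ⇒ FL10); `adx_pos` (predict_point's divisor); `drawLine_index`, `floorTail_index` (the `x1 > n` clamp);
       `mul_i16_u8_bound` (do_floor's `hy`, so draw_line's `dy ≠ INT_MIN`).

  2. THE CLAUSES.
       FloorShape Blk mem f         FL1 (1 ≤ floor_count ≤ 64), FL2 (`Blk (floorBlock mem f)`): all that an ACCESS of a floor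
                                    element needs, so it is available inside start_decoder's floor loop too
       IsFloor mem f g              `g` is the element of some `i < floor_count`   (`IsFloor.of_lt`, `IsFloor.of_eq`)
       ClassOK mem g cbc c          FL6 for one class `c`: `.dim .sub .master .books`
       NbOK mem g j                 FL10 for one `j`
       Floor1OK mem g cbc           FL4 … FL10 for the floor at `g`: `.FL4 .FL5 .FL6 .FL7 .FL8 .FL9 .FL10`   (no block predicate)
       FloorsOK Blk mem f           GROUP FloorOK: FL1, FL2, FL3, and `Floor1OK` of every floor:  `(h.floor hg).FL9 q hq`
       FY1 Blk mem f                GROUP FinalYOK: every `finalY[c]`, `c < channels`, is an allocated block of SOME size `sz`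
                                    with `2·values ≤ sz` for EVERY floor
       RangeListOK mem R            SH7 for `range_list` = {256, 128, 86, 64} at address `R`

  3. USE (all return `Site Live a n`; `hL : BlkLive Blk Live` is the first hypothesis: `h.site_Xlist hL hg hj ha`).
       `FloorShape.site_*` (one per field of `Floor1`, by array bound; `site_elem` for any offset inside the element;
       `site_Xlist_range` for the call of `neighbors`), `FloorShape.elem_in` (the geometry), `FloorShape.elem_inside hg hok`;
       `site_f`, `site_floor_count`, `site_floor_config`, `site_floor_types`, `site_finalY_ptr`, `site_codebook_count` (fields of
       `*f`: `hL` and `hob : Blk (objBlock f)`, which is `OB1.blk`), `stb_vorbis_inside hok hob`;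
       `FY1.site hL h hc hg hj ha`, `FY1.block` (the allocated block and its size bound, for a callee).
       VALUE facts: `Floor1OK.*` (`pcl_lt`, `class_lt`, `values_bounds`, `idx_lt_250`, `offset_lt`, `offset_end`, `sorted_lt`,
       `nb_lt`, `adx_pos`, `master_lt`, `book_range`, `book_idx_lt`, `mult_idx`), `FloorsOK.type_ne_zero`, `RangeListOK.value`.
       Globals and stack objects (the worker knows them live from the shadow layer: `ShadowInv.live_other`, `live_frame`):
       `site_range_list`, `site_inverse_db`, `site_step2_flag`, `site_p`, `site_output` take `(Block.mk …).live Live` directly.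

  4. FRAME (over `Blk`, `Kept`, `ObjEq`; no `Live`, no `Covers`). For each of the two groups `P` = `FloorsOK`, `FY1`:
       P.wins                       the windows of `*f` the clauses read:  `FloorsOK.wins = [(160, 320)]`,
                                    `FY1.wins = [(4, 8), (176, 180), (312, 320), (1264, 1392)]`
       P.Reads mem f                the blocks whose CONTENT they read:    both: `floorBlock mem f`
       P.Owns mem f                 the blocks the SHAPE clauses mention:  `FloorsOK`: `floorBlock mem f`;
                                    `FY1`: any block based at a `finalY[c]`, `c < channels`
       P.transfer                   h : P Blk mem p → ObjEq P.wins mem p mem' f → (∀ B, P.Reads mem p B → B.Kept mem mem')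
                                    → (∀ B, P.Owns mem p B → Blk B → Blk' B) → P Blk' mem' f
                                    (`FY1.transfer` also takes `hshape : FloorShape Blk mem p` and `hC : channels mem p ≤ 16`)
       P.frame                      the instance `p = f`, `ObjSame f mem mem'`, same `Blk`
       P.reblk                      another block predicate, same memory
       P.store                      ONE store of the walker inside a block disjoint from what the group reads
       FloorsOK.owns_blk / reads_blk, FY1.owns_blk
     Finer: `FloorsOK.transfer_of_hdr` / `frame_of_bound` (the header fields as `FloorHdrEq mem p mem' f`, same address:
       `FloorHdrSame mem mem' f`; `FloorHdrEq.of_objEq`, `FloorHdrSame.of_same` from `floorHdr f` = `[f + 160, f + 320)`,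
       `floorHdr_disjoint`), `FY1.transfer_of_eq` / `frame_of_eq` (field by field), `FloorShape.frame / reblk / elem_kept /
       isFloor_frame`, `FloorsUpTo.frame`, `Floor1OK.frame` (one element kept: `Block.Kept` of its 1596 bytes; the record
       does not move), `Floor1.same_*` (every accessor of `Floor1` over `Block.Same` of the element), `RangeListOK.frame`.

  5. ESTABLISH (start_decoder's floor section, one transient per loop, each with `.zero` / `.two`, `.step`, `.of_eq` and the
       exit lemma):
       FloorsUpTo (3966) · PclUpTo (3985) · ClassesUpTo / BooksUpTo (3990 / 3997) · XLUpTo, XL (4003–4011) ·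
       PFill (4015) → PID → qsort (`RecordsPreserved`) → PID · SortedUpTo (4023) → FL9 · NbUpTo (4026), `NbOK.of_post` → FL10 ·
       `Floor1OK.of_transients` · LongestOK (4033) and FYUpTo (4161; `.of_eq`, `.reblk` over the allocation of the next
       channel) → `FY1.of_upTo`.

  NOT FROM THIS FILE: the globals' and stack objects' liveness (`(Block.mk T 1024).live Live` for `inverse_db_table`,
  `(Block.mk R 16).live Live` for `range_list`, the 256-byte stack object that holds `step2_flag`, the 1000-byte `p`) are
  hypotheses here: they come from SH5 / the frame layouts (Asan/Stack.lean, Vorbis/Frames.lean, Vorbis/Globals.lean).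
  Disjointness of the floor block, the finalY blocks and `*f` is `BlkOK.disjoint` (they are different allocated blocks).
-/
import Vorbis.Fields
namespace Vorbis
open X86 X86.User Asan

/-! ### 1. Pure arithmetic -/

/-- `sumTo d n = d 0 + … + d (n-1)`: the Σ of FL8 (`values = 2 + Σ_{j < partitions} class_dimensions[pcl[j]]`) and of the
offset invariant of vorbis_decode_packet_rest's partition loop. -/
def sumTo (d : Nat → Nat) : Nat → Nat
  | 0 => 0
  | n + 1 => sumTo d n + d n

/-- The empty sum. -/
theorem sumTo_zero (d : Nat → Nat) : sumTo d 0 = 0 := id rfl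

/-- One more term: the step of both Σ loops (4007 in start_decoder, 3242 in vorbis_decode_packet_rest). -/
theorem sumTo_succ (d : Nat → Nat) (n : Nat) : sumTo d (n + 1) = sumTo d n + d n := id rfl

/-- The partial sums grow. -/
theorem sumTo_mono (d : Nat → Nat) {j n : Nat} (h : j ≤ n) : sumTo d j ≤ sumTo d n := by
  induction n with
  | zero =>
    have e : j = 0 := by omega
    subst e
    exact Nat.le_refl _
  | succ n ih =>
    by_cases hj : j = n + 1
    · subst hj
      exact Nat.le_refl _
    · have h1 := ih (by omega)
      rw [sumTo_succ]
      omega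

/-- A partial sum plus the next term is still a partial sum. -/
theorem sumTo_succ_le (d : Nat → Nat) {j n : Nat} (h : j < n) : sumTo d j + d j ≤ sumTo d n := by
  have h1 := sumTo_mono d (Nat.succ_le_of_lt h)
  rw [sumTo_succ] at h1
  exact h1

/-- Terms of at most `b` sum to at most `b * n`. -/
theorem sumTo_le_mul (d : Nat → Nat) (b n : Nat) (h : ∀ j, j < n → d j ≤ b) : sumTo d n ≤ b * n := by
  induction n with
  | zero => exact Nat.le_refl _
  | succ n ih =>
    have h1 := ih (fun j hj => h j (by omega))
    have h2 := h n (by omega)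
    rw [sumTo_succ, Nat.mul_succ]
    omega

/-- The sum depends only on the terms below `n`. -/
theorem sumTo_congr (d d' : Nat → Nat) (n : Nat) (h : ∀ j, j < n → d j = d' j) : sumTo d n = sumTo d' n := by
  induction n with
  | zero => rfl
  | succ n ih =>
    rw [sumTo_succ, sumTo_succ, ih (fun j hj => h j (by omega)), h n (by omega)]

/-- **FL8's range**: at most 31 partitions of dimension at most 8 give `values ≤ 250`, the capacity of `Xlist`,
`sorted_order`, `neighbors` and of start_decoder's array `p`. -/
theorem values_le_250 (d : Nat → Nat) (p : Nat) (hp : p ≤ 31) (hd : ∀ j, j < p → d j ≤ 8) : 2 + sumTo d p ≤ 250 := by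
  have h := sumTo_le_mul d 8 p hd
  omega

/-- **The offset invariant against FL8** (vorbis_decode_packet_rest, loops 3242 / 3252): inside partition `j`, at element
`k` of its class, `offset = 2 + Σ_{j' < j} + k` is below `values = 2 + Σ_{j' < partitions}`. -/
theorem offset_lt_values (d : Nat → Nat) {j p k : Nat} (hj : j < p) (hk : k < d j) :
    2 + sumTo d j + k < 2 + sumTo d p := by
  have h := sumTo_succ_le d hj
  omega

/-- **`values ≤ 249` at the `Xlist[values]` store** (start_decoder, loop 4009): the closed form `2 + 8 j + k`. -/
theorem xlist_store_le_249 (d : Nat → Nat) {j p k : Nat} (hj : j < p) (hp : p ≤ 31) (hd : ∀ j', j' < p → d j' ≤ 8)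
    (hk : k < d j) : 2 + sumTo d j + k ≤ 249 := by
  have h1 := sumTo_le_mul d 8 j (fun j' hj' => hd j' (by omega))
  have h2 := hd j hj
  omega

/-- `cval & csub` with `csub = (1 << cbits) - 1`: below `2 ^ cbits` whatever `cval` is (DECODE may have returned -1). -/
theorem mask_lt (x b : Nat) : x &&& (2 ^ b - 1) < 2 ^ b := by
  rw [Nat.and_two_pow_sub_one_eq_mod]
  exact Nat.mod_lt _ (Nat.two_pow_pos b)

/-- `1 << cbits ≤ 8` for `cbits ≤ 3`: the second dimension of `subclass_books`. -/
theorem two_pow_le_8 (b : Nat) (hb : b ≤ 3) : 2 ^ b ≤ 8 := by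
  have h : 2 ^ b ≤ 2 ^ 3 := Nat.pow_le_pow_right (by decide) hb
  exact h

/-- `1 << rangebits` fits `uint16` for `rangebits ≤ 15` (the store `Xlist[1] = 1 << rangebits`). -/
theorem two_pow_le_32768 (b : Nat) (hb : b ≤ 15) : 2 ^ b ≤ 32768 := by
  have h : 2 ^ b ≤ 2 ^ 15 := Nat.pow_le_pow_right (by decide) hb
  exact h

/-- **The post of `neighbors(x, j, &low, &hi)` with `low = hi = 0` before the call, plus XL, gives FL10 for `j`** — pure form
over an abstract list `X`. `R = 2 ^ rangebits = X 1` is above every later entry, so `hi` is always set; `low` is set, or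
stays `0` with `X 0 = 0 ≤ X j`. Independent of the sort and of the duplicate test. -/
theorem neighbors_post (X : Nat → Nat) (j R low hi : Nat) (hj : 2 ≤ j) (h0 : X 0 = 0) (h1 : X 1 = R) (hjR : X j < R)
    (hlow : (∃ i, i < j ∧ X i < X j) → low < j ∧ X low < X j)
    (hlow0 : ¬ (∃ i, i < j ∧ X i < X j) → low = 0)
    (hhi : (∃ i, i < j ∧ X j < X i) → hi < j ∧ X j < X hi) :
    low < j ∧ hi < j ∧ X low ≤ X j ∧ X j < X hi := by
  have hhi' := hhi ⟨1, by omega, by omega⟩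
  by_cases hex : ∃ i, i < j ∧ X i < X j
  · have hl := hlow hex
    exact ⟨hl.1, hhi'.1, Nat.le_of_lt hl.2, hhi'.2⟩
  · have hl := hlow0 hex
    subst hl
    exact ⟨by omega, hhi'.1, by omega, hhi'.2⟩

/-- **predict_point's divisor**: `x0 = Xlist[low] ≤ Xlist[j] < Xlist[high] = x1`, all `uint16`, give
`0 < adx = x1 - x0 < 65536` as integers: no wrap in the 32-bit subtraction, `adx ≠ 0` and `adx ≠ -1`, so the `idiv` of
predict_point can fault neither by zero nor by overflow. -/
theorem adx_pos (x0 x x1 : Nat) (h01 : x0 ≤ x) (h12 : x < x1) (h1 : x1 < 65536) :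
    0 < (x1 : Int) - (x0 : Int) ∧ (x1 : Int) - (x0 : Int) < 65536 ∧ 0 ≤ (x : Int) - (x0 : Int) := by
  omega

/-- **draw_line's index under the `x1 > n` clamp**: with `x1' = (if x1 > n then n else x1)`, every `x` with
`x0 ≤ x < x1'` and `0 ≤ x0` is an index of `output[0 .. n)`. (`x = x0` is the first store, `x0 < x` the loop.) -/
theorem drawLine_index (x0 x x1 n : Int) (h0 : 0 ≤ x0) (hx0 : x0 ≤ x) (hx : x < (if n < x1 then n else x1)) :
    0 ≤ x ∧ x < n := by
  split at hx <;> omega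

/-- The same for do_floor's tail loop `for (j = lx; j < n2; ++j)`, `0 ≤ lx`. -/
theorem floorTail_index (lx j n2 : Int) (h0 : 0 ≤ lx) (hj0 : lx ≤ j) (hj : j < n2) : 0 ≤ j ∧ j < n2 := by
  omega

/-- **do_floor's `hy = finalY[j] * g->floor1_multiplier`** (an `int16` times a byte) stays far inside `int`: `|hy| ≤ 32768 * 255`.
Two such values differ by less than `2 ^ 24`, so draw_line's `dy = hy - ly` is never `INT_MIN` (its `idiv` cannot overflow). -/
theorem mul_i16_u8_bound (y : Int) (m : Nat) (hy : -32768 ≤ y ∧ y < 32768) (hm : m < 256) :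
    -8355840 ≤ y * (m : Int) ∧ y * (m : Int) ≤ 8355585 := by
  have hm0 : (0 : Int) ≤ (m : Int) := Int.natCast_nonneg m
  have hm1 : (m : Int) ≤ 255 := by omega
  constructor
  · have h1 : (-y) * (m : Int) ≤ 32768 * 255 := Int.mul_le_mul (by omega) hm1 hm0 (by omega)
    rw [Int.neg_mul] at h1
    omega
  · by_cases h0 : 0 ≤ y
    · have h1 : y * (m : Int) ≤ 32767 * 255 := Int.mul_le_mul (by omega) hm1 hm0 (by omega)
      omega
    · have h1 : y * (m : Int) ≤ 0 := Int.mul_nonpos_of_nonpos_of_nonneg (by omega) hm0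
      omega

/-! ### 2. One floor: FL4 … FL10 -/

/-- `Σ_{j' < n} class_dimensions[partition_class_list[j']]` of the floor at `g`: the Σ of FL8. -/
def Floor1.dimSum (mem : Mem) (g n : Nat) : Nat :=
  sumTo (fun j => Floor1.class_dimensions mem g (Floor1.partition_class_list mem g j)) n

/-- One more partition. -/
theorem Floor1.dimSum_succ (mem : Mem) (g n : Nat) :
    Floor1.dimSum mem g (n + 1)
      = Floor1.dimSum mem g n + Floor1.class_dimensions mem g (Floor1.partition_class_list mem g n) := id rfl

/-- No partition. -/
theorem Floor1.dimSum_zero (mem : Mem) (g : Nat) : Floor1.dimSum mem g 0 = 0 := id rfl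

/-- **FL6 for one class `c`** of the floor at `g` (`cbc` = codebook_count): dimension 1..8, at most 3 subclass bits, the
master book a codebook index when there are subclass bits, every initialised subclass book `-1` or a codebook index
(`int16`, signed). Relied on by `cb(masterbook)`, `subclass_books[pclass][cval & csub]`, `cb(book)` under `book ≥ 0`. -/
structure ClassOK (mem : Mem) (g : Nat) (cbc : Int) (c : Nat) : Prop where
  /-- `1 ≤ class_dimensions[c] ≤ 8` -/
  dim : 1 ≤ Floor1.class_dimensions mem g c ∧ Floor1.class_dimensions mem g c ≤ 8
  /-- `class_subclasses[c] ≤ 3` -/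
  sub : Floor1.class_subclasses mem g c ≤ 3
  /-- `class_subclasses[c] ≠ 0 → class_masterbooks[c] < codebook_count` -/
  master : Floor1.class_subclasses mem g c ≠ 0 → (Floor1.class_masterbooks mem g c : Int) < cbc
  /-- `∀ k < 2 ^ class_subclasses[c]: -1 ≤ subclass_books[c][k] < codebook_count` -/
  books : ∀ k : Nat, k < 2 ^ Floor1.class_subclasses mem g c →
    -1 ≤ Floor1.subclass_books mem g c k ∧ Floor1.subclass_books mem g c k < cbc

/-- **FL10 for one `j`**: both neighbours are earlier points, and their X coordinates bracket `Xlist[j]`. -/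
def NbOK (mem : Mem) (g j : Nat) : Prop :=
  Floor1.neighbors mem g j 0 < j ∧ Floor1.neighbors mem g j 1 < j ∧
    Floor1.Xlist mem g (Floor1.neighbors mem g j 0) ≤ Floor1.Xlist mem g j ∧
    Floor1.Xlist mem g j < Floor1.Xlist mem g (Floor1.neighbors mem g j 1)

/-- **FL4 … FL10 for the floor at `g`** (INVARIANTS §3.3; `cbc` = `f->codebook_count`). All CONTENT / FIELD clauses: no
block predicate in here (that is FL2, in `FloorShape`), so the structure is carried over a store by `Floor1OK.frame` alone. -/
structure Floor1OK (mem : Mem) (g : Nat) (cbc : Int) : Prop where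
  /-- FL4: `partitions ≤ 31` -/
  FL4 : Floor1.partitions mem g ≤ 31
  /-- FL5: `∀ j < partitions: partition_class_list[j] ≤ 15` -/
  FL5 : ∀ j : Nat, j < Floor1.partitions mem g → Floor1.partition_class_list mem g j ≤ 15
  /-- FL6: every class in use is `ClassOK` -/
  FL6 : ∀ j : Nat, j < Floor1.partitions mem g → ClassOK mem g cbc (Floor1.partition_class_list mem g j)
  /-- FL7: `1 ≤ floor1_multiplier ≤ 4` -/
  FL7 : 1 ≤ Floor1.floor1_multiplier mem g ∧ Floor1.floor1_multiplier mem g ≤ 4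
  /-- FL8: `values = 2 + Σ_{j < partitions} class_dimensions[pcl[j]]` (hence `2 ≤ values ≤ 250`: `values_bounds`) -/
  FL8 : Floor1.values mem g = 2 + (Floor1.dimSum mem g (Floor1.partitions mem g) : Int)
  /-- FL9: `∀ q < values: sorted_order[q] < values` -/
  FL9 : ∀ q : Nat, (q : Int) < Floor1.values mem g → (Floor1.sorted_order mem g q : Int) < Floor1.values mem g
  /-- FL10: `∀ j, 2 ≤ j < values`: `NbOK` -/
  FL10 : ∀ j : Nat, 2 ≤ j → (j : Int) < Floor1.values mem g → NbOK mem g j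

namespace Floor1OK
variable {mem : Mem} {g : Nat} {cbc : Int}

/-- FL4 ⇒ an index of `partition_class_list[32]`. -/
theorem pcl_lt (h : Floor1OK mem g cbc) {j : Nat} (hj : j < Floor1.partitions mem g) :
    j < Off.Floor1.partition_class_list.count := by
  have h4 := h.FL4
  simp only [voff]
  omega

/-- FL5 ⇒ an index of the four `class_*[16]` arrays. -/
theorem class_lt (h : Floor1OK mem g cbc) {j : Nat} (hj : j < Floor1.partitions mem g) :
    Floor1.partition_class_list mem g j < Off.Floor1.class_dimensions.count := by
  have h5 := h.FL5 j hj
  simp only [voff]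
  omega

/-- The Σ is at most `8 * n` for `n ≤ partitions`. -/
theorem dimSum_le (h : Floor1OK mem g cbc) {n : Nat} (hn : n ≤ Floor1.partitions mem g) : Floor1.dimSum mem g n ≤ 8 * n := by
  apply sumTo_le_mul
  intro j hj
  exact (h.FL6 j (by omega)).dim.2

/-- **FL8's range: `2 ≤ values ≤ 250`.** -/
theorem values_bounds (h : Floor1OK mem g cbc) : 2 ≤ Floor1.values mem g ∧ Floor1.values mem g ≤ 250 := by
  have h8 := h.FL8
  have h4 := h.FL4
  have hs := h.dimSum_le (Nat.le_refl _)
  omega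

/-- An index below `values` is an index of `Xlist[250]`, `sorted_order[250]`, `neighbors[250]`, `p[250]`. -/
theorem idx_lt_250 (h : Floor1OK mem g cbc) {j : Nat} (hj : (j : Int) < Floor1.values mem g) : j < 250 := by
  have hv := h.values_bounds
  omega

/-- **The offset of `finalY[offset++]`** (vorbis_decode_packet_rest 3259 / 3261): in partition `j < partitions`, element
`k < class_dimensions[pcl[j]]`, `offset = 2 + Σ_{j' < j} + k < values`. -/
theorem offset_lt (h : Floor1OK mem g cbc) {j k : Nat} (hj : j < Floor1.partitions mem g)
    (hk : k < Floor1.class_dimensions mem g (Floor1.partition_class_list mem g j)) :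
    ((2 + Floor1.dimSum mem g j + k : Nat) : Int) < Floor1.values mem g := by
  have h8 := h.FL8
  have hs := offset_lt_values (fun j => Floor1.class_dimensions mem g (Floor1.partition_class_list mem g j)) hj hk
  unfold Floor1.dimSum at *
  omega

/-- After the partition loop `offset = values` exactly. -/
theorem offset_end (h : Floor1OK mem g cbc) :
    ((2 + Floor1.dimSum mem g (Floor1.partitions mem g) : Nat) : Int) = Floor1.values mem g := by
  have h8 := h.FL8
  omega

/-- FL9 as an index bound: `sorted_order[q] < 250`, and below `values` (do_floor: `finalY[j]`, `Xlist[j]`). -/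
theorem sorted_lt (h : Floor1OK mem g cbc) {q : Nat} (hq : (q : Int) < Floor1.values mem g) :
    (Floor1.sorted_order mem g q : Int) < Floor1.values mem g ∧ Floor1.sorted_order mem g q < 250 := by
  have h9 := h.FL9 q hq
  have hv := h.values_bounds
  omega

/-- FL10 as index bounds: `low, high < j < values` (vorbis_decode_packet_rest: `finalY[low/high]`, `Xlist[low/high]`). -/
theorem nb_lt (h : Floor1OK mem g cbc) {j : Nat} (h2 : 2 ≤ j) (hj : (j : Int) < Floor1.values mem g) :
    ((Floor1.neighbors mem g j 0 : Nat) : Int) < Floor1.values mem g ∧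
      ((Floor1.neighbors mem g j 1 : Nat) : Int) < Floor1.values mem g := by
  have hn := h.FL10 j h2 hj
  unfold NbOK at hn
  omega

/-- **FL10 ⇒ predict_point's `adx > 0`** at the call of line 3271: `x0 = Xlist[low]`, `x1 = Xlist[high]`, `x = Xlist[j]`. -/
theorem adx_pos (h : Floor1OK mem g cbc) {j : Nat} (h2 : 2 ≤ j) (hj : (j : Int) < Floor1.values mem g) :
    0 < (Floor1.Xlist mem g (Floor1.neighbors mem g j 1) : Int) - (Floor1.Xlist mem g (Floor1.neighbors mem g j 0) : Int) ∧
      (Floor1.Xlist mem g (Floor1.neighbors mem g j 1) : Int) - (Floor1.Xlist mem g (Floor1.neighbors mem g j 0) : Int) < 65536 ∧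
      0 ≤ (Floor1.Xlist mem g j : Int) - (Floor1.Xlist mem g (Floor1.neighbors mem g j 0) : Int) := by
  have hn := h.FL10 j h2 hj
  unfold NbOK at hn
  have hx : Floor1.Xlist mem g (Floor1.neighbors mem g j 1) < 2 ^ 16 := by
    simp only [vacc]
    exact mem.u16_lt _
  exact Vorbis.adx_pos _ _ _ hn.2.2.1 hn.2.2.2 hx

/-- FL6: the master book of the class of partition `j` is a codebook index (used under `cbits ≠ 0`). -/
theorem master_lt (h : Floor1OK mem g cbc) {j : Nat} (hj : j < Floor1.partitions mem g)
    (hs : Floor1.class_subclasses mem g (Floor1.partition_class_list mem g j) ≠ 0) :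
    (Floor1.class_masterbooks mem g (Floor1.partition_class_list mem g j) : Int) < cbc :=
  (h.FL6 j hj).master hs

/-- FL6: `book = subclass_books[pclass][cval & csub]` is `-1` or a codebook index, whatever `cval` is
(`csub = 2 ^ cbits - 1`; the index is `x &&& csub` for the unsigned reading `x` of `cval`). -/
theorem book_range (h : Floor1OK mem g cbc) {j : Nat} (hj : j < Floor1.partitions mem g) (x : Nat) :
    -1 ≤ Floor1.subclass_books mem g (Floor1.partition_class_list mem g j)
          (x &&& (2 ^ Floor1.class_subclasses mem g (Floor1.partition_class_list mem g j) - 1)) ∧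
      Floor1.subclass_books mem g (Floor1.partition_class_list mem g j)
          (x &&& (2 ^ Floor1.class_subclasses mem g (Floor1.partition_class_list mem g j) - 1)) < cbc :=
  (h.FL6 j hj).books _ (mask_lt x _)

/-- FL6: the masked index is an index of a row of `subclass_books[16][8]`. -/
theorem book_idx_lt (h : Floor1OK mem g cbc) {j : Nat} (hj : j < Floor1.partitions mem g) (x : Nat) :
    x &&& (2 ^ Floor1.class_subclasses mem g (Floor1.partition_class_list mem g j) - 1)
      < Off.Floor1.subclass_books.count2 := by
  have h1 := mask_lt x (Floor1.class_subclasses mem g (Floor1.partition_class_list mem g j))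
  have h2 := two_pow_le_8 _ (h.FL6 j hj).sub
  simp only [voff]
  omega

/-- FL7 as the index of `range_list[mult - 1]`. -/
theorem mult_idx (h : Floor1OK mem g cbc) : Floor1.floor1_multiplier mem g - 1 < 4 := by
  have h7 := h.FL7
  omega

end Floor1OK

/-! #### Frame of one floor: every accessor of `Floor1` over `Block.Same` of the element

`hs : (Block.mk g Off.sizeof.Floor).Same mem mem'` ("the 1596 bytes at `g` read the same") and `hg : g + Off.sizeof.Floor ≤ 2 ^ 64`.
The index conditions are the widest that keep the read inside the element, so a byte-valued index needs none. -/

section FrameOne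
variable {mem mem' : Mem} {g : Nat}

/-- A byte of the element. -/
theorem Floor1.same_u8 (hs : (Block.mk g Off.sizeof.Floor).Same mem mem') (hg : g + Off.sizeof.Floor ≤ 2 ^ 64) (off : Nat)
    (ho : off + 1 ≤ Off.sizeof.Floor) : mem'.u8 (g + off) = mem.u8 (g + off) := by
  simp only [vblock, voff] at hs hg ho
  exact hs.u8 _ (by omega) (by omega) hg

/-- A `uint16` of the element. -/
theorem Floor1.same_u16 (hs : (Block.mk g Off.sizeof.Floor).Same mem mem') (hg : g + Off.sizeof.Floor ≤ 2 ^ 64) (off : Nat)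
    (ho : off + 2 ≤ Off.sizeof.Floor) : mem'.u16 (g + off) = mem.u16 (g + off) := by
  simp only [vblock, voff] at hs hg ho
  exact hs.u16 _ (by omega) (by omega) hg

/-- An `int16` of the element. -/
theorem Floor1.same_i16 (hs : (Block.mk g Off.sizeof.Floor).Same mem mem') (hg : g + Off.sizeof.Floor ≤ 2 ^ 64) (off : Nat)
    (ho : off + 2 ≤ Off.sizeof.Floor) : mem'.i16 (g + off) = mem.i16 (g + off) := by
  simp only [vblock, voff] at hs hg ho
  exact hs.i16 _ (by omega) (by omega) hg

/-- An `int` of the element. -/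
theorem Floor1.same_i32 (hs : (Block.mk g Off.sizeof.Floor).Same mem mem') (hg : g + Off.sizeof.Floor ≤ 2 ^ 64) (off : Nat)
    (ho : off + 4 ≤ Off.sizeof.Floor) : mem'.i32 (g + off) = mem.i32 (g + off) := by
  simp only [vblock, voff] at hs hg ho
  exact hs.i32 _ (by omega) (by omega) hg

variable (hs : (Block.mk g Off.sizeof.Floor).Same mem mem') (hg : g + Off.sizeof.Floor ≤ 2 ^ 64)
include hs hg

/-- `partitions` over `Same`. -/
theorem Floor1.same_partitions : Floor1.partitions mem' g = Floor1.partitions mem g := by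
  simp only [vacc]
  exact Floor1.same_u8 hs hg Off.Floor1.partitions (by simp only [voff]; omega)

/-- `partition_class_list[j]` over `Same` (any byte-sized index). -/
theorem Floor1.same_partition_class_list (j : Nat) (hj : j < 256) :
    Floor1.partition_class_list mem' g j = Floor1.partition_class_list mem g j := by
  simp only [vacc]
  rw [Nat.add_assoc]
  exact Floor1.same_u8 hs hg (Off.Floor1.partition_class_list + j) (by simp only [voff]; omega)

/-- `class_dimensions[c]` over `Same` (any byte-sized index). -/
theorem Floor1.same_class_dimensions (c : Nat) (hc : c < 256) :
    Floor1.class_dimensions mem' g c = Floor1.class_dimensions mem g c := by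
  simp only [vacc]
  rw [Nat.add_assoc]
  exact Floor1.same_u8 hs hg (Off.Floor1.class_dimensions + c) (by simp only [voff]; omega)

/-- `class_subclasses[c]` over `Same` (any byte-sized index). -/
theorem Floor1.same_class_subclasses (c : Nat) (hc : c < 256) :
    Floor1.class_subclasses mem' g c = Floor1.class_subclasses mem g c := by
  simp only [vacc]
  rw [Nat.add_assoc]
  exact Floor1.same_u8 hs hg (Off.Floor1.class_subclasses + c) (by simp only [voff]; omega)

/-- `class_masterbooks[c]` over `Same` (any byte-sized index). -/
theorem Floor1.same_class_masterbooks (c : Nat) (hc : c < 256) :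
    Floor1.class_masterbooks mem' g c = Floor1.class_masterbooks mem g c := by
  simp only [vacc]
  rw [Nat.add_assoc]
  exact Floor1.same_u8 hs hg (Off.Floor1.class_masterbooks + c) (by simp only [voff]; omega)

/-- `subclass_books[c][k]` over `Same`. -/
theorem Floor1.same_subclass_books (c k : Nat) (hc : c < 16) (hk : k < 8) :
    Floor1.subclass_books mem' g c k = Floor1.subclass_books mem g c k := by
  simp only [vacc]
  rw [Nat.add_assoc]
  exact Floor1.same_i16 hs hg _ (by simp only [voff]; omega)

/-- `Xlist[j]` over `Same` (any byte-sized index). -/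
theorem Floor1.same_Xlist (j : Nat) (hj : j < 256) : Floor1.Xlist mem' g j = Floor1.Xlist mem g j := by
  simp only [vacc]
  rw [Nat.add_assoc]
  exact Floor1.same_u16 hs hg _ (by simp only [voff]; omega)

/-- `sorted_order[q]` over `Same` (any byte-sized index). -/
theorem Floor1.same_sorted_order (q : Nat) (hq : q < 256) : Floor1.sorted_order mem' g q = Floor1.sorted_order mem g q := by
  simp only [vacc]
  rw [Nat.add_assoc]
  exact Floor1.same_u8 hs hg (Off.Floor1.sorted_order + q) (by simp only [voff]; omega)

/-- `neighbors[j][k]` over `Same`. -/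
theorem Floor1.same_neighbors (j k : Nat) (hj : j < 250) (hk : k < 2) :
    Floor1.neighbors mem' g j k = Floor1.neighbors mem g j k := by
  simp only [vacc]
  rw [Nat.add_assoc]
  exact Floor1.same_u8 hs hg _ (by simp only [voff]; omega)

/-- `floor1_multiplier` over `Same`. -/
theorem Floor1.same_floor1_multiplier : Floor1.floor1_multiplier mem' g = Floor1.floor1_multiplier mem g := by
  simp only [vacc]
  exact Floor1.same_u8 hs hg Off.Floor1.floor1_multiplier (by simp only [voff]; omega)

/-- `rangebits` over `Same`. -/
theorem Floor1.same_rangebits : Floor1.rangebits mem' g = Floor1.rangebits mem g := by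
  simp only [vacc]
  exact Floor1.same_u8 hs hg Off.Floor1.rangebits (by simp only [voff]; omega)

/-- `values` over `Same`. -/
theorem Floor1.same_values : Floor1.values mem' g = Floor1.values mem g := by
  simp only [vacc]
  exact Floor1.same_i32 hs hg Off.Floor1.values (by simp only [voff]; omega)

end FrameOne

/-! #### Byte-sized values are below 256 (indices read from the element need no further bound in the frame lemmas) -/

/-- A class number is a byte. -/
theorem Floor1.partition_class_list_lt (mem : Mem) (g j : Nat) : Floor1.partition_class_list mem g j < 256 := by
  simp only [vacc]
  exact mem.u8_lt _

/-- `partitions` is a byte. -/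
theorem Floor1.partitions_lt (mem : Mem) (g : Nat) : Floor1.partitions mem g < 256 := by
  simp only [vacc]
  exact mem.u8_lt _

/-- `class_subclasses[c]` is a byte. -/
theorem Floor1.class_subclasses_lt (mem : Mem) (g c : Nat) : Floor1.class_subclasses mem g c < 256 := by
  simp only [vacc]
  exact mem.u8_lt _

/-- `sorted_order[q]` is a byte (do_floor: `j` is zero-extended). -/
theorem Floor1.sorted_order_lt (mem : Mem) (g q : Nat) : Floor1.sorted_order mem g q < 256 := by
  simp only [vacc]
  exact mem.u8_lt _

/-- `neighbors[j][k]` is a byte: an index of `step2_flag[256]` whatever it is. -/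
theorem Floor1.neighbors_lt (mem : Mem) (g j k : Nat) : Floor1.neighbors mem g j k < 256 := by
  simp only [vacc]
  exact mem.u8_lt _

/-- `Xlist[j]` is a `uint16`. -/
theorem Floor1.Xlist_lt (mem : Mem) (g j : Nat) : Floor1.Xlist mem g j < 65536 := by
  simp only [vacc]
  exact mem.u16_lt _

/-! #### Carrying the clauses of one floor from `mem` to `mem'`

Two levels. `X.of_eq`: the clause in `mem'` from the clause in `mem` and the EQUALITIES of exactly the accessors it reads — what
a store INSIDE the element (start_decoder's floor section) leaves true. `Floor1OK.frame`: the whole structure over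
`Block.Kept` of the element (it reads the same and does not wrap) — what every store outside the element leaves true. The
record does not move, so this is the one-address form of the frame lemma (the element `g` on both sides). -/

/-- FL6 of one class, from the equalities of the four table entries it reads. -/
theorem ClassOK.of_eq {mem mem' : Mem} {g c : Nat} {cbc : Int} (h : ClassOK mem g cbc c)
    (hd : Floor1.class_dimensions mem' g c = Floor1.class_dimensions mem g c)
    (hsb : Floor1.class_subclasses mem' g c = Floor1.class_subclasses mem g c)
    (hm : Floor1.class_masterbooks mem' g c = Floor1.class_masterbooks mem g c)
    (hb : ∀ k : Nat, k < 8 → Floor1.subclass_books mem' g c k = Floor1.subclass_books mem g c k) :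
    ClassOK mem' g cbc c := by
  have h8 := two_pow_le_8 _ h.sub
  constructor
  · rw [hd]
    exact h.dim
  · rw [hsb]
    exact h.sub
  · rw [hsb, hm]
    exact h.master
  · intro k hk
    rw [hsb] at hk
    rw [hb k (by omega)]
    exact h.books k hk

/-- FL10 for one `j`, from the equalities of its two `neighbors` entries and of `Xlist[0 .. j]`. -/
theorem NbOK.of_eq {mem mem' : Mem} {g j : Nat} (h : NbOK mem g j)
    (hn0 : Floor1.neighbors mem' g j 0 = Floor1.neighbors mem g j 0)
    (hn1 : Floor1.neighbors mem' g j 1 = Floor1.neighbors mem g j 1)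
    (hx : ∀ i : Nat, i ≤ j → Floor1.Xlist mem' g i = Floor1.Xlist mem g i) : NbOK mem' g j := by
  unfold NbOK at *
  have e0 := hx (Floor1.neighbors mem g j 0) (by omega)
  have e1 := hx (Floor1.neighbors mem g j 1) (by omega)
  have ej := hx j (Nat.le_refl _)
  rw [hn0, hn1, e0, e1, ej]
  exact h

/-- The Σ of FL8 from the equalities of the entries it reads. -/
theorem Floor1.dimSum_congr {mem mem' : Mem} {g : Nat} (n : Nat)
    (hp : ∀ j : Nat, j < n → Floor1.partition_class_list mem' g j = Floor1.partition_class_list mem g j)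
    (hd : ∀ j : Nat, j < n → Floor1.class_dimensions mem' g (Floor1.partition_class_list mem g j)
        = Floor1.class_dimensions mem g (Floor1.partition_class_list mem g j)) :
    Floor1.dimSum mem' g n = Floor1.dimSum mem g n := by
  unfold Floor1.dimSum
  apply sumTo_congr
  intro j hj
  rw [hp j hj, hd j hj]

section FrameOne'
variable {mem mem' : Mem} {g : Nat} {cbc : Int}

/-- The Σ of FL8 over `Same` of the element. -/
theorem Floor1.same_dimSum (hs : (Block.mk g Off.sizeof.Floor).Same mem mem') (hg : g + Off.sizeof.Floor ≤ 2 ^ 64)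
    (n : Nat) (hn : n ≤ 256) : Floor1.dimSum mem' g n = Floor1.dimSum mem g n := by
  apply Floor1.dimSum_congr
  · intro j hj
    exact Floor1.same_partition_class_list hs hg j (by omega)
  · intro j _
    exact Floor1.same_class_dimensions hs hg _ (Floor1.partition_class_list_lt mem g j)

/-- FL6 of one class over `Kept` of the element. -/
theorem ClassOK.frame {c : Nat} (h : ClassOK mem g cbc c) (hk : (Block.mk g Off.sizeof.Floor).Kept mem mem')
    (hc : c < 16) : ClassOK mem' g cbc c := by
  have hs := hk.same
  have hg := hk.inside
  simp only [] at hg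
  apply h.of_eq
  · exact Floor1.same_class_dimensions hs hg c (by omega)
  · exact Floor1.same_class_subclasses hs hg c (by omega)
  · exact Floor1.same_class_masterbooks hs hg c (by omega)
  · intro k hk8
    exact Floor1.same_subclass_books hs hg c k hc hk8

/-- FL10 for one `j` over `Kept` of the element. -/
theorem NbOK.frame {j : Nat} (h : NbOK mem g j) (hk : (Block.mk g Off.sizeof.Floor).Kept mem mem') (hj : j < 250) :
    NbOK mem' g j := by
  have hs := hk.same
  have hg := hk.inside
  simp only [] at hg
  apply h.of_eq
  · exact Floor1.same_neighbors hs hg j 0 hj (by omega)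
  · exact Floor1.same_neighbors hs hg j 1 hj (by omega)
  · intro i hi
    exact Floor1.same_Xlist hs hg i (by omega)

/-- **FRAME of one floor**: FL4 … FL10 survive every store that keeps the 1596 bytes of the element (`Block.Kept`: they read the
same and do not wrap). The record does not move: the same `g` on both sides. A worker gets `hk` for one element from `Kept` of
the block of FL2 by `FloorShape.elem_kept`. -/
theorem Floor1OK.frame (h : Floor1OK mem g cbc) (hk : (Block.mk g Off.sizeof.Floor).Kept mem mem') :
    Floor1OK mem' g cbc := by
  have hs := hk.same
  have hg := hk.inside
  simp only [] at hg
  have ep := Floor1.same_partitions hs hg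
  have ev := Floor1.same_values hs hg
  have h4 := h.FL4
  constructor
  · rw [ep]
    exact h4
  · intro j hj
    rw [ep] at hj
    rw [Floor1.same_partition_class_list hs hg j (by omega)]
    exact h.FL5 j hj
  · intro j hj
    rw [ep] at hj
    rw [Floor1.same_partition_class_list hs hg j (by omega)]
    have h5 := h.FL5 j hj
    exact (h.FL6 j hj).frame hk (by omega)
  · rw [Floor1.same_floor1_multiplier hs hg]
    exact h.FL7
  · rw [ev, ep, Floor1.same_dimSum hs hg _ (by omega)]
    exact h.FL8
  · intro q hq
    rw [ev] at hq
    rw [ev, Floor1.same_sorted_order hs hg q (by have := h.idx_lt_250 hq; omega)]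
    exact h.FL9 q hq
  · intro j h2 hj
    rw [ev] at hj
    exact (h.FL10 j h2 hj).frame hk (h.idx_lt_250 hj)

end FrameOne'

/-! ### 3. All floors: FL1, FL2, FL3, and `Floor1OK` of each -/

/-- **The block of FL2**: `floor_count` elements of `sizeof(Floor)` = 1596 bytes at `f->floor_config`. -/
def floorBlock (mem : Mem) (f : Nat) : Block :=
  ⟨stb_vorbis.floor_config mem f, Off.sizeof.Floor * (stb_vorbis.floor_count mem f).toNat⟩

/-- **FL1 and FL2**, the SHAPE half of the floor clauses: `1 ≤ floor_count ≤ 64`, and `floor_config` is the base of an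
allocated block of exactly `1596 * floor_count` bytes (`Blk` = "is an allocated block", Vorbis/Blocks.lean §2). All that an
ACCESS to a floor element needs (`FloorShape.site_*`), so it is usable inside start_decoder's floor loop, where the contents are
not yet there. -/
structure FloorShape (Blk : Block → Prop) (mem : Mem) (f : Nat) : Prop where
  /-- FL1: `1 ≤ floor_count ≤ 64` -/
  FL1 : 1 ≤ stb_vorbis.floor_count mem f ∧ stb_vorbis.floor_count mem f ≤ 64
  /-- FL2: `Block(floor_config, 1596 * floor_count)` -/
  FL2 : Blk (floorBlock mem f)

/-- **`g` is a floor of `f`**: `g = g(i) = floor_config + 1596 * i` for some `i < floor_count`. A segment proves it once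
(from MP6: `submap_floor[s] < floor_count`, or from the loop counter of 3966) and uses it at every access of the element. -/
def IsFloor (mem : Mem) (f g : Nat) : Prop :=
  ∃ i : Nat, (i : Int) < stb_vorbis.floor_count mem f ∧ g = stb_vorbis.floor_config_at mem f i

/-- The element of an index below `floor_count` is a floor. -/
theorem IsFloor.of_lt {mem : Mem} {f i : Nat} (hi : (i : Int) < stb_vorbis.floor_count mem f) :
    IsFloor mem f (stb_vorbis.floor_config_at mem f i) :=
  ⟨i, hi, rfl⟩

/-- The element as the stepper computes it, `floor_config + 1596 * i` in any arrangement. -/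
theorem IsFloor.of_eq {mem : Mem} {f g i : Nat} (hi : (i : Int) < stb_vorbis.floor_count mem f)
    (hg : g = stb_vorbis.floor_config mem f + Off.sizeof.Floor * i) : IsFloor mem f g :=
  ⟨i, hi, hg⟩

namespace FloorShape
variable {Blk Blk' : Block → Prop} {Live : Nat → Prop} {mem mem' : Mem} {f g a : Nat}

/-- **The geometry of every access to a floor element**: `n` bytes at offset `off` of the element `g`, `off + n ≤ 1596`, lie
inside the block of FL2. -/
theorem elem_in (h : FloorShape Blk mem f) (hg : IsFloor mem f g) {off n : Nat} (ho : off + n ≤ Off.sizeof.Floor) :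
    (floorBlock mem f).contains (g + off) n := by
  obtain ⟨i, hi, rfl⟩ := hg
  have h1 := h.FL1
  simp only [floorBlock, Block.contains, stb_vorbis.floor_config_at, voff] at *
  omega

/-- The element does not wrap and is in the data space (`BlkOK.inside` of the block of FL2). -/
theorem elem_inside (h : FloorShape Blk mem f) (hg : IsFloor mem f g) (hok : BlkOK Blk) :
    0x100000 ≤ g ∧ g + Off.sizeof.Floor ≤ 0xC00000 := by
  have hin := h.elem_in hg (off := 0) (n := Off.sizeof.Floor) (Nat.le_refl _)
  have hb := hok.inside _ h.FL2
  simp only [Block.contains, Nat.add_zero] at hin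
  omega

/-- **USE, generic**: any `n ≥ 1` bytes at offset `off` inside the element (`off + n ≤ 1596`) are a check site. For an index
that is only known to be a byte (do_floor's `Xlist[j]` before FL9 is applied) this is the lemma to use. With `off = 0`,
`n = 1596` it says that the whole element is live (`.inLive`). -/
theorem site_elem (hL : BlkLive Blk Live) (h : FloorShape Blk mem f) (hg : IsFloor mem f g) (off n : Nat)
    (ho : off + n ≤ Off.sizeof.Floor) (hn : 1 ≤ n) (ha : a = g + off) : Site Live a n := by
  subst ha
  have hin := h.elem_in hg ho
  exact Site.of_blk hL h.FL2 hin.1 hin.2 hn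

/-- `g->partitions` (load1 / store1). -/
theorem site_partitions (hL : BlkLive Blk Live) (h : FloorShape Blk mem f) (hg : IsFloor mem f g)
    (ha : a = g + Off.Floor1.partitions) : Site Live a 1 :=
  h.site_elem hL hg Off.Floor1.partitions 1 (by simp only [voff]; omega) (by omega) ha

/-- `g->partition_class_list[j]`, `j < 32` (from `j < partitions ≤ 31`: `Floor1OK.pcl_lt`). -/
theorem site_partition_class_list (hL : BlkLive Blk Live) (h : FloorShape Blk mem f) (hg : IsFloor mem f g) {j : Nat}
    (hj : j < Off.Floor1.partition_class_list.count) (ha : a = g + Off.Floor1.partition_class_list + j) : Site Live a 1 :=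
  h.site_elem hL hg (Off.Floor1.partition_class_list + j) 1 (by simp only [voff] at hj ⊢; omega) (by omega) (by omega)

/-- `g->class_dimensions[c]`, `c < 16` (FL5: `Floor1OK.class_lt`). -/
theorem site_class_dimensions (hL : BlkLive Blk Live) (h : FloorShape Blk mem f) (hg : IsFloor mem f g) {c : Nat}
    (hc : c < Off.Floor1.class_dimensions.count) (ha : a = g + Off.Floor1.class_dimensions + c) : Site Live a 1 :=
  h.site_elem hL hg (Off.Floor1.class_dimensions + c) 1 (by simp only [voff] at hc ⊢; omega) (by omega) (by omega)

/-- `g->class_subclasses[c]`, `c < 16`. -/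
theorem site_class_subclasses (hL : BlkLive Blk Live) (h : FloorShape Blk mem f) (hg : IsFloor mem f g) {c : Nat}
    (hc : c < Off.Floor1.class_subclasses.count) (ha : a = g + Off.Floor1.class_subclasses + c) : Site Live a 1 :=
  h.site_elem hL hg (Off.Floor1.class_subclasses + c) 1 (by simp only [voff] at hc ⊢; omega) (by omega) (by omega)

/-- `g->class_masterbooks[c]`, `c < 16`. -/
theorem site_class_masterbooks (hL : BlkLive Blk Live) (h : FloorShape Blk mem f) (hg : IsFloor mem f g) {c : Nat}
    (hc : c < Off.Floor1.class_masterbooks.count) (ha : a = g + Off.Floor1.class_masterbooks + c) : Site Live a 1 :=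
  h.site_elem hL hg (Off.Floor1.class_masterbooks + c) 1 (by simp only [voff] at hc ⊢; omega) (by omega) (by omega)

/-- `g->subclass_books[c][k]`, `c < 16`, `k < 8` (`k = cval & csub`: `Floor1OK.book_idx_lt`; in setup `k < 1 << cbits ≤ 8`). -/
theorem site_subclass_books (hL : BlkLive Blk Live) (h : FloorShape Blk mem f) (hg : IsFloor mem f g) {c k : Nat}
    (hc : c < Off.Floor1.subclass_books.count) (hk : k < Off.Floor1.subclass_books.count2)
    (ha : a = g + Off.Floor1.subclass_books + Off.Floor1.subclass_books.elem * (Off.Floor1.subclass_books.count2 * c + k)) :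
    Site Live a 2 :=
  h.site_elem hL hg
    (Off.Floor1.subclass_books + Off.Floor1.subclass_books.elem * (Off.Floor1.subclass_books.count2 * c + k)) 2
    (by simp only [voff] at hc hk ⊢; omega) (by omega) (by simp only [voff] at ha ⊢; omega)

/-- `g->Xlist[j]`, `j < 250` (`j < values`: `Floor1OK.idx_lt_250`; `j = sorted_order[q]`: `Floor1OK.sorted_lt`;
`j = neighbors[..]`: `Floor1OK.nb_lt`; the store `Xlist[values]` of setup: `xlist_store_le_249`). -/
theorem site_Xlist (hL : BlkLive Blk Live) (h : FloorShape Blk mem f) (hg : IsFloor mem f g) {j : Nat}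
    (hj : j < Off.Floor1.Xlist.count) (ha : a = g + Off.Floor1.Xlist + Off.Floor1.Xlist.elem * j) : Site Live a 2 :=
  h.site_elem hL hg (Off.Floor1.Xlist + Off.Floor1.Xlist.elem * j) 2 (by simp only [voff] at hj ⊢; omega) (by omega)
    (by simp only [voff] at ha ⊢; omega)

/-- `g->Xlist[0 .. j]`, the `2 * (j + 1)` bytes that `neighbors(g->Xlist, j, …)` may read (`j < 250`): its precondition at the
call of line 4028. -/
theorem site_Xlist_range (hL : BlkLive Blk Live) (h : FloorShape Blk mem f) (hg : IsFloor mem f g) {j : Nat}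
    (hj : j < Off.Floor1.Xlist.count) (ha : a = g + Off.Floor1.Xlist) : Site Live a (Off.Floor1.Xlist.elem * (j + 1)) :=
  h.site_elem hL hg Off.Floor1.Xlist (Off.Floor1.Xlist.elem * (j + 1)) (by simp only [voff] at hj ⊢; omega)
    (by simp only [voff]; omega) ha

/-- `g->sorted_order[q]`, `q < 250` (`q < values`). -/
theorem site_sorted_order (hL : BlkLive Blk Live) (h : FloorShape Blk mem f) (hg : IsFloor mem f g) {q : Nat}
    (hq : q < Off.Floor1.sorted_order.count) (ha : a = g + Off.Floor1.sorted_order + q) : Site Live a 1 :=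
  h.site_elem hL hg (Off.Floor1.sorted_order + q) 1 (by simp only [voff] at hq ⊢; omega) (by omega) (by omega)

/-- `g->neighbors[j][k]`, `j < 250`, `k < 2`. -/
theorem site_neighbors (hL : BlkLive Blk Live) (h : FloorShape Blk mem f) (hg : IsFloor mem f g) {j k : Nat}
    (hj : j < Off.Floor1.neighbors.count) (hk : k < Off.Floor1.neighbors.count2)
    (ha : a = g + Off.Floor1.neighbors + (Off.Floor1.neighbors.count2 * j + k)) : Site Live a 1 :=
  h.site_elem hL hg (Off.Floor1.neighbors + (Off.Floor1.neighbors.count2 * j + k)) 1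
    (by simp only [voff] at hj hk ⊢; omega) (by omega) (by simp only [voff] at ha ⊢; omega)

/-- `g->floor1_multiplier`. -/
theorem site_floor1_multiplier (hL : BlkLive Blk Live) (h : FloorShape Blk mem f) (hg : IsFloor mem f g)
    (ha : a = g + Off.Floor1.floor1_multiplier) : Site Live a 1 :=
  h.site_elem hL hg Off.Floor1.floor1_multiplier 1 (by simp only [voff]; omega) (by omega) ha

/-- `g->rangebits`. -/
theorem site_rangebits (hL : BlkLive Blk Live) (h : FloorShape Blk mem f) (hg : IsFloor mem f g)
    (ha : a = g + Off.Floor1.rangebits) : Site Live a 1 :=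
  h.site_elem hL hg Off.Floor1.rangebits 1 (by simp only [voff]; omega) (by omega) ha

/-- `g->values` (an `int`: load4 / store4). -/
theorem site_values (hL : BlkLive Blk Live) (h : FloorShape Blk mem f) (hg : IsFloor mem f g)
    (ha : a = g + Off.Floor1.values) : Site Live a 4 :=
  h.site_elem hL hg Off.Floor1.values 4 (by simp only [voff]; omega) (by omega) ha

/-- The `Floor0` arm of setup (3967–3979: parsed, then rejected): `g->book_list[j]`, `j < 16` (`j < number_of_books ≤ 16`). The
scalar `Floor0` fields are `site_elem` with their `Off.Floor.floor0.*` offset. -/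
theorem site_floor0_book_list (hL : BlkLive Blk Live) (h : FloorShape Blk mem f) (hg : IsFloor mem f g) {j : Nat}
    (hj : j < Off.Floor.floor0.book_list.count) (ha : a = g + Off.Floor.floor0.book_list + j) : Site Live a 1 :=
  h.site_elem hL hg (Off.Floor.floor0.book_list + j) 1 (by simp only [voff] at hj ⊢; omega) (by omega) (by omega)

/-- Two different elements do not overlap (a store into element `i` keeps element `i'`: `Block.Kept.of_writeLE`). -/
theorem elems_disjoint (mem : Mem) (f : Nat) {i i' : Nat} (hne : i ≠ i') :
    (Block.mk (stb_vorbis.floor_config_at mem f i) Off.sizeof.Floor).disjoint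
      (Block.mk (stb_vorbis.floor_config_at mem f i') Off.sizeof.Floor) := by
  simp only [Block.disjoint, stb_vorbis.floor_config_at, voff]
  omega

/-- **Another block predicate** in which the block of FL2 is still allocated (the arena grew; the stack objects of a popped
frame left the predicate). The memory is the same. -/
theorem reblk (h : FloorShape Blk mem f) (hB : Blk (floorBlock mem f) → Blk' (floorBlock mem f)) : FloorShape Blk' mem f :=
  ⟨h.FL1, hB h.FL2⟩

/-- **FRAME of the shape**: the two fields of `*f` read the same (the block's CONTENTS do not matter here). -/
theorem frame (h : FloorShape Blk mem f) (hfc : stb_vorbis.floor_count mem' f = stb_vorbis.floor_count mem f)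
    (hcfg : stb_vorbis.floor_config mem' f = stb_vorbis.floor_config mem f) : FloorShape Blk mem' f := by
  have e : floorBlock mem' f = floorBlock mem f := by
    unfold floorBlock
    rw [hfc, hcfg]
  constructor
  · rw [hfc]
    exact h.FL1
  · rw [e]
    exact h.FL2

end FloorShape

/-! #### Accesses to `*f` that the floor code makes (from OB1: `objBlock f`, the 1808 bytes at `f`, is an allocated block) -/

section SitesOfF
variable {Blk : Block → Prop} {Live : Nat → Prop} {f a : Nat}

/-- Any field of `*f`: the `n` bytes at offset `off`. (The same as `OB1.site` of Vorbis/Blocks.lean, from the block alone.) -/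
theorem site_f (hL : BlkLive Blk Live) (hob : Blk (objBlock f)) (off n : Nat) (ho : off + n ≤ Off.sizeof.stb_vorbis)
    (hn : 1 ≤ n) (ha : a = f + off) : Site Live a n := by
  subst ha
  apply Site.of_blk hL hob
  · simp only [vblock]
    omega
  · simp only [vblock]
    omega
  · exact hn

/-- OB1 in numbers: `*f` lies in the data space (so `f + 1808 ≤ 2 ^ 64` wherever a frame lemma asks for it). -/
theorem stb_vorbis_inside (hok : BlkOK Blk) (hob : Blk (objBlock f)) :
    0x100000 ≤ f ∧ f + Off.sizeof.stb_vorbis ≤ 0xC00000 := by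
  have h := hok.inside _ hob
  simp only [vblock] at h
  exact h

/-- `f->floor_count`. -/
theorem site_floor_count (hL : BlkLive Blk Live) (hob : Blk (objBlock f)) (ha : a = f + Off.stb_vorbis.floor_count) :
    Site Live a 4 :=
  site_f hL hob Off.stb_vorbis.floor_count 4 (by simp only [voff]; omega) (by omega) ha

/-- `f->floor_config`. -/
theorem site_floor_config (hL : BlkLive Blk Live) (hob : Blk (objBlock f)) (ha : a = f + Off.stb_vorbis.floor_config) :
    Site Live a 8 :=
  site_f hL hob Off.stb_vorbis.floor_config 8 (by simp only [voff]; omega) (by omega) ha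

/-- `f->floor_types[i]`, `i < 64` (`i < floor_count ≤ 64`; in the decoder `i = submap_floor[s] < floor_count` by MP6). -/
theorem site_floor_types (hL : BlkLive Blk Live) (hob : Blk (objBlock f)) {i : Nat}
    (hi : i < Off.stb_vorbis.floor_types.count)
    (ha : a = f + Off.stb_vorbis.floor_types + Off.stb_vorbis.floor_types.elem * i) : Site Live a 2 :=
  site_f hL hob (Off.stb_vorbis.floor_types + Off.stb_vorbis.floor_types.elem * i) 2
    (by simp only [voff] at hi ⊢; omega) (by omega) (by simp only [voff] at ha ⊢; omega)

/-- `f->finalY[c]` (the pointer), `c < 16` (`c < channels ≤ 16`: HD1). -/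
theorem site_finalY_ptr (hL : BlkLive Blk Live) (hob : Blk (objBlock f)) {c : Nat} (hc : c < Off.stb_vorbis.finalY.count)
    (ha : a = f + Off.stb_vorbis.finalY + Off.stb_vorbis.finalY.elem * c) : Site Live a 8 :=
  site_f hL hob (Off.stb_vorbis.finalY + Off.stb_vorbis.finalY.elem * c) 8 (by simp only [voff] at hc ⊢; omega)
    (by omega) (by simp only [voff] at ha ⊢; omega)

/-- `f->codebook_count` (the two range tests of FL6 in setup). -/
theorem site_codebook_count (hL : BlkLive Blk Live) (hob : Blk (objBlock f)) (ha : a = f + Off.stb_vorbis.codebook_count) :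
    Site Live a 4 :=
  site_f hL hob Off.stb_vorbis.codebook_count 4 (by simp only [voff]; omega) (by omega) ha

end SitesOfF


/-- **FL1 … FL10** (group FloorOK of the top-level invariant): the shape, every floor of type 1, and `Floor1OK` (FL4 … FL10) of
every floor. A proof reads a clause of one floor as `(h.floor hg).FL9 q hq` with `hg : IsFloor mem f g`. Established by
start_decoder's floor section (point SD.6), read-only afterwards. -/
structure FloorsOK (Blk : Block → Prop) (mem : Mem) (f : Nat) : Prop extends FloorShape Blk mem f where
  /-- FL3: `∀ i < floor_count: floor_types[i] = 1` (a floor 0 is rejected at setup) -/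
  FL3 : ∀ i : Nat, (i : Int) < stb_vorbis.floor_count mem f → stb_vorbis.floor_types mem f i = 1
  /-- FL4 … FL10 of every floor -/
  floors : ∀ i : Nat, (i : Int) < stb_vorbis.floor_count mem f →
    Floor1OK mem (stb_vorbis.floor_config_at mem f i) (stb_vorbis.codebook_count mem f)

/-- **The invariant of start_decoder's loop 3966** (`for (i = 0; i < f->floor_count; ++i)`): the shape, and FL3 … FL10 of
the floors below `n`. `n = 0` after the allocation, `n = floor_count` at SD.6. -/
structure FloorsUpTo (Blk : Block → Prop) (mem : Mem) (f : Nat) (n : Nat) : Prop extends FloorShape Blk mem f where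
  /-- FL3 below `n` -/
  FL3 : ∀ i : Nat, i < n → stb_vorbis.floor_types mem f i = 1
  /-- FL4 … FL10 below `n` -/
  floors : ∀ i : Nat, i < n → Floor1OK mem (stb_vorbis.floor_config_at mem f i) (stb_vorbis.codebook_count mem f)

/-! #### What the floor clauses read of the decoder object -/

/-- **The windows of `*f` that FL1 … FL10 read**: `[160, 320)` = `codebook_count` (the bound of FL6), `codebooks` (not read, it
lies between), `floor_count`, `floor_types[64]`, `floor_config`. No decode-time store goes there. -/
def FloorsOK.wins : Wins := [(160, 320)]

/-- The numerals of `FloorsOK.wins` are the generated offsets (a change of the layout fails here). -/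
example : FloorsOK.wins = [(Off.stb_vorbis.codebook_count, Off.stb_vorbis.floor_config + 8)] := by
  simp only [FloorsOK.wins, voff]

/-- **The header fields of the object at `f` in `mem'` have the values of the object at `p` in `mem`**: what the floor clauses
read of the decoder object, field by field. From `ObjEq FloorsOK.wins` (`FloorHdrEq.of_objEq`), from `Block.Same` of
`floorHdr f` (`FloorHdrSame.of_same`), or field by field. -/
structure FloorHdrEq (mem : Mem) (p : Nat) (mem' : Mem) (f : Nat) : Prop where
  /-- `f->codebook_count` (the bound of FL6) -/
  codebook_count : stb_vorbis.codebook_count mem' f = stb_vorbis.codebook_count mem p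
  /-- `f->floor_count` -/
  floor_count : stb_vorbis.floor_count mem' f = stb_vorbis.floor_count mem p
  /-- `f->floor_types[0 .. 64)` -/
  floor_types : ∀ i : Nat, i < Off.stb_vorbis.floor_types.count →
    stb_vorbis.floor_types mem' f i = stb_vorbis.floor_types mem p i
  /-- `f->floor_config` -/
  floor_config : stb_vorbis.floor_config mem' f = stb_vorbis.floor_config mem p

/-- **The same-address instance**: the header fields of `*f` read the same in `mem'`. (An abbreviation: every lemma about
`FloorHdrEq` applies, `hh.floor_count` is the field.) -/
abbrev FloorHdrSame (mem mem' : Mem) (f : Nat) : Prop := FloorHdrEq mem f mem' f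

/-- The bytes of `*f` from `codebook_count` to the end of `floor_config` (`[f + 160, f + 320)`: codebook_count, codebooks,
floor_count, floor_types[64], floor_config): all the floor clauses read of the decoder object, as a block. It is the one window
of `FloorsOK.wins`. -/
def floorHdr (f : Nat) : Block :=
  ⟨f + Off.stb_vorbis.codebook_count, Off.stb_vorbis.floor_config + 8 - Off.stb_vorbis.codebook_count⟩

/-- `floorHdr f` is the window `(160, 320)` of `FloorsOK.wins`. -/
example (f : Nat) : floorHdr f = ⟨f + 160, 160⟩ := by
  simp only [floorHdr, voff]

/-- `floorHdr f` is a part of `*f`. -/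
theorem floorHdr_sub (f : Nat) :
    floorHdr f = (objBlock f).sub Off.stb_vorbis.codebook_count
      (Off.stb_vorbis.floor_config + 8 - Off.stb_vorbis.codebook_count) := rfl

/-- A block disjoint from `*f` is disjoint from the header fields. -/
theorem floorHdr_disjoint {f : Nat} {C : Block} (hd : (objBlock f).disjoint C) : (floorHdr f).disjoint C := by
  simp only [floorHdr, vblock, voff] at *
  omega

/-- **The windows read the same ⇒ the four fields do**: how `FloorsOK.transfer` consumes its `he`. -/
theorem FloorHdrEq.of_objEq {mem mem' : Mem} {p f : Nat} (he : ObjEq FloorsOK.wins mem p mem' f) :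
    FloorHdrEq mem p mem' f := by
  constructor
  · simp only [vacc, voff]
    exact he.i32 160 (by decide)
  · simp only [vacc, voff]
    exact he.i32 176 (by decide)
  · intro i hi
    simp only [vacc, voff] at hi ⊢
    rw [Nat.add_assoc f, Nat.add_assoc p]
    exact he.u16 (180 + 2 * i) (InWins.of_mem (160, 320) (by decide) (by omega) (by omega))
  · simp only [vacc, voff]
    exact he.u64 312 (by decide)

/-- The header block reads the same ⇒ the four fields do (same address). -/
theorem FloorHdrSame.of_same {mem mem' : Mem} {f : Nat} (hs : (floorHdr f).Same mem mem')
    (hf : f + Off.sizeof.stb_vorbis ≤ 2 ^ 64) : FloorHdrSame mem mem' f := by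
  simp only [floorHdr, vblock, voff] at hs hf
  constructor
  · simp only [vacc, voff]
    exact hs.i32 _ (by omega) (by omega) (by omega)
  · simp only [vacc, voff]
    exact hs.i32 _ (by omega) (by omega) (by omega)
  · intro i hi
    simp only [vacc, voff] at hi ⊢
    exact hs.u16 _ (by omega) (by omega) (by omega)
  · simp only [vacc, voff]
    exact hs.u64 _ (by omega) (by omega) (by omega)

/-- Nothing changed. -/
theorem FloorHdrEq.refl (mem : Mem) (f : Nat) : FloorHdrEq mem f mem f :=
  ⟨rfl, rfl, fun _ _ => rfl, rfl⟩

/-- Two steps (`p` in `mem`, then `q` in `mem'`, then `f` in `mem''`). -/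
theorem FloorHdrEq.trans {mem mem' mem'' : Mem} {p q f : Nat} (h1 : FloorHdrEq mem p mem' q)
    (h2 : FloorHdrEq mem' q mem'' f) : FloorHdrEq mem p mem'' f :=
  ⟨h2.codebook_count.trans h1.codebook_count, h2.floor_count.trans h1.floor_count,
    fun i hi => (h2.floor_types i hi).trans (h1.floor_types i hi), h2.floor_config.trans h1.floor_config⟩

/-- The block of FL2 of the object at `f` in `mem'` is the block of FL2 of the object at `p` in `mem`. -/
theorem FloorHdrEq.floorBlock_eq {mem mem' : Mem} {p f : Nat} (hh : FloorHdrEq mem p mem' f) :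
    floorBlock mem' f = floorBlock mem p := by
  unfold floorBlock
  rw [hh.floor_count, hh.floor_config]

/-- The address of element `i` is the same. -/
theorem FloorHdrEq.floor_config_at {mem mem' : Mem} {p f : Nat} (hh : FloorHdrEq mem p mem' f) (i : Nat) :
    stb_vorbis.floor_config_at mem' f i = stb_vorbis.floor_config_at mem p i := by
  simp only [stb_vorbis.floor_config_at]
  rw [hh.floor_config]

namespace FloorShape
variable {Blk : Block → Prop} {mem mem' : Mem} {p f g : Nat}

/-- The block of FL2 reads the same ⇒ every element does. -/
theorem elem_same (h : FloorShape Blk mem f) (hg : IsFloor mem f g) (hs : (floorBlock mem f).Same mem mem') :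
    (Block.mk g Off.sizeof.Floor).Same mem mem' := by
  have hin := h.elem_in hg (off := 0) (n := Off.sizeof.Floor) (Nat.le_refl _)
  simp only [Block.contains, Nat.add_zero] at hin
  exact Mem.EqOn.mono hs hin.1 hin.2

/-- **The block of FL2 is kept ⇒ every element is**: the hypothesis of `Floor1OK.frame` for one floor. -/
theorem elem_kept (h : FloorShape Blk mem f) (hg : IsFloor mem f g) (hk : (floorBlock mem f).Kept mem mem') :
    (Block.mk g Off.sizeof.Floor).Kept mem mem' := by
  have hin := h.elem_in hg (off := 0) (n := Off.sizeof.Floor) (Nat.le_refl _)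
  simp only [Block.contains, Nat.add_zero] at hin
  exact hk.mono hin.1 hin.2

/-- A floor of the object at `p` in `mem` is a floor of the object at `f` in `mem'` when the header fields have the same
values (same address: `hh : FloorHdrSame mem mem' f`). -/
theorem isFloor_frame (hh : FloorHdrEq mem p mem' f) (hg : IsFloor mem p g) : IsFloor mem' f g := by
  obtain ⟨i, hi, rfl⟩ := hg
  refine ⟨i, ?_, ?_⟩
  · rw [hh.floor_count]
    exact hi
  · rw [hh.floor_config_at]

end FloorShape

/-- **The blocks whose CONTENT FL3 … FL10 read**: the block of FL2 (the `Floor` records). (`floor_types` is read in `*f`: that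
is `FloorsOK.wins`.) -/
inductive FloorsOK.Reads (mem : Mem) (f : Nat) : Block → Prop
  /-- `Block(floor_config, 1596 * floor_count)` (FL2) -/
  | config : FloorsOK.Reads mem f (floorBlock mem f)

/-- **The blocks the SHAPE clauses of FL1 … FL10 mention**: the block of FL2. -/
inductive FloorsOK.Owns (mem : Mem) (f : Nat) : Block → Prop
  /-- `Block(floor_config, 1596 * floor_count)` (FL2) -/
  | config : FloorsOK.Owns mem f (floorBlock mem f)

namespace FloorsOK
variable {Blk Blk' : Block → Prop} {mem mem' : Mem} {p f g : Nat}

/-- **FL4 … FL10 of the floor at `g`.** -/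
theorem floor (h : FloorsOK Blk mem f) (hg : IsFloor mem f g) : Floor1OK mem g (stb_vorbis.codebook_count mem f) := by
  obtain ⟨i, hi, rfl⟩ := hg
  exact h.floors i hi

/-- FL3 in the form of the decode-time test `f->floor_types[floor] == 0`: the branch is dead. -/
theorem type_ne_zero (h : FloorsOK Blk mem f) {i : Nat} (hi : (i : Int) < stb_vorbis.floor_count mem f) :
    stb_vorbis.floor_types mem f i ≠ 0 := by
  rw [h.FL3 i hi]
  decide

/-- An index below `floor_count` is an index of `floor_types[64]`. -/
theorem idx_lt_64 (h : FloorsOK Blk mem f) {i : Nat} (hi : (i : Int) < stb_vorbis.floor_count mem f) :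
    i < Off.stb_vorbis.floor_types.count := by
  have h1 := h.FL1
  simp only [voff]
  omega

/-- Every owned block is allocated (FL2). -/
theorem owns_blk (h : FloorsOK Blk mem f) {B : Block} (hO : FloorsOK.Owns mem f B) : Blk B := by
  cases hO with
  | config => exact h.FL2

/-- Every block whose content the clauses read is allocated (FL2): so `AllKept Blk mem mem'` gives the `hk` of `transfer`. -/
theorem reads_blk (h : FloorsOK Blk mem f) {B : Block} (hR : FloorsOK.Reads mem f B) : Blk B := by
  cases hR with
  | config => exact h.FL2

/-- **The two-address frame of FL1 … FL10, field by field**: the header fields of the object at `f` in `mem'` have the values of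
the object at `p` in `mem`, the block of FL2 is kept, and it is still allocated. The core of `transfer` and `frame_of_bound`. -/
theorem transfer_of_hdr (h : FloorsOK Blk mem p) (hh : FloorHdrEq mem p mem' f)
    (hk : (floorBlock mem p).Kept mem mem') (hB : Blk' (floorBlock mem p)) : FloorsOK Blk' mem' f := by
  have h1 := h.FL1
  refine ⟨⟨?_, ?_⟩, ?_, ?_⟩
  · rw [hh.floor_count]
    exact h1
  · rw [hh.floorBlock_eq]
    exact hB
  · intro i hi
    rw [hh.floor_count] at hi
    rw [hh.floor_types i (h.idx_lt_64 hi)]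
    exact h.FL3 i hi
  · intro i hi
    rw [hh.floor_count] at hi
    have hg : IsFloor mem p (stb_vorbis.floor_config_at mem p i) := IsFloor.of_lt hi
    rw [hh.floor_config_at i, hh.codebook_count]
    exact (h.floors i hi).frame (h.toFloorShape.elem_kept hg hk)

/-- **THE TWO-ADDRESS FRAME LEMMA of the group FL1 … FL10** (Vorbis/Blocks.lean §5). The windows `FloorsOK.wins` of the object at
`f` in `mem'` read as those of the object at `p` in `mem`; the block of FL2 is kept; it is still allocated. FRAME is the instance
`p = f` (`frame`), TRANSPORT the instance `ObjEq.of_copied` (`*f = p`), a change of the block predicate alone is `reblk`. -/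
theorem transfer (h : FloorsOK Blk mem p) (he : ObjEq FloorsOK.wins mem p mem' f)
    (hk : ∀ B, FloorsOK.Reads mem p B → B.Kept mem mem') (hB : ∀ B, FloorsOK.Owns mem p B → Blk B → Blk' B) :
    FloorsOK Blk' mem' f :=
  h.transfer_of_hdr (FloorHdrEq.of_objEq he) (hk _ FloorsOK.Reads.config) (hB _ FloorsOK.Owns.config h.FL2)

/-- **FRAME of FL1 … FL10**, the usual form: same address, `*f` reads the same except the two arena offsets (what every
allocator call leaves: `ObjSame`), and the block of FL2 is kept. For decode-time stores into `*f` use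
`h.transfer (hd.sub (by decide)) hk (fun _ _ hb => hb)` with `hd : DecodeSame f mem mem'`. -/
theorem frame (h : FloorsOK Blk mem f) (hs : ObjSame f mem mem') (hk : ∀ B, FloorsOK.Reads mem f B → B.Kept mem mem') :
    FloorsOK Blk mem' f :=
  h.transfer (hs.sub (by decide)) hk (fun _ _ hb => hb)

/-- **Another block predicate** in which the block of FL2 is still allocated; the memory is the same. -/
theorem reblk (h : FloorsOK Blk mem f) (hB : ∀ B, FloorsOK.Owns mem f B → Blk B → Blk' B) : FloorsOK Blk' mem f :=
  ⟨⟨h.FL1, hB _ FloorsOK.Owns.config h.FL2⟩, h.FL3, h.floors⟩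

/-- **FRAME of FL1 … FL10 over `Block.Same`**: the header fields of `*f` and the block of FL2 read the same. `ht`: the block does
not wrap (`BlkOK.no_wrap` of FL2; it is the `inside` of `Block.Kept`). -/
theorem frame_of_bound (h : FloorsOK Blk mem f) (hh : FloorHdrSame mem mem' f) (hs : (floorBlock mem f).Same mem mem')
    (ht : (floorBlock mem f).base + (floorBlock mem f).size ≤ 2 ^ 64) : FloorsOK Blk mem' f :=
  h.transfer_of_hdr hh ⟨hs, ht⟩ h.FL2

/-- **The commonest FRAME case: ONE store of the walker**, `mem.writeLE (addr b) k v`, inside a block `C` that meets neither the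
header fields of `*f` (`floorHdr f`: true of every block disjoint from `*f` by `floorHdr_disjoint`, and of the bit-reader fields
of `*f` itself) nor the block of FL2 (finalY, channel buffers, the stack, `step2_flag` …). For two allocated blocks the
disjointness is `hok.disjoint hB hC hne`, and `hC` is `hok.no_wrap`. -/
theorem store (h : FloorsOK Blk mem f) (hok : BlkOK Blk) (hob : Blk (objBlock f)) {C : Block} (b k v : Nat)
    (hin : C.contains b k) (hdh : (floorHdr f).disjoint C) (hdg : (floorBlock mem f).disjoint C)
    (hC : C.base + C.size ≤ 2 ^ 64) : FloorsOK Blk (mem.writeLE (addr b) k v) f := by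
  have hf := stb_vorbis_inside hok hob
  have hh : FloorHdrSame mem (mem.writeLE (addr b) k v) f :=
    FloorHdrSame.of_same (Block.Same.of_writeLE mem b k v hdh hin hC) (by omega)
  have hk : (floorBlock mem f).Kept mem (mem.writeLE (addr b) k v) :=
    Block.Kept.of_writeLE mem b k v hdg hin hC (hok.no_wrap h.FL2)
  exact h.transfer_of_hdr hh hk h.FL2

end FloorsOK

namespace FloorsUpTo
variable {Blk : Block → Prop} {mem mem' : Mem} {f g n : Nat}

/-- After `f->floor_count = …; f->floor_config = setup_malloc(…)`: no floor yet. -/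
theorem zero (h : FloorShape Blk mem f) : FloorsUpTo Blk mem f 0 :=
  ⟨h, fun _ hi => absurd hi (Nat.not_lt_zero _), fun _ hi => absurd hi (Nat.not_lt_zero _)⟩

/-- **The exit of loop 3966**: `i = floor_count` ⇒ FL1 … FL10. -/
theorem done (h : FloorsUpTo Blk mem f n) (hn : stb_vorbis.floor_count mem f ≤ (n : Int)) : FloorsOK Blk mem f :=
  ⟨h.toFloorShape, fun i hi => h.FL3 i (by omega), fun i hi => h.floors i (by omega)⟩

/-- **FRAME inside the loop**: a store that leaves the header fields and the elements BELOW `n` alone (a store into element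
`n`: `FloorShape.elems_disjoint` + `Block.Kept.of_writeLE`; into `floor_types[n]`; into the stack; `get_bits`' footprint). The
elements below `n` are kept one by one, because the block of FL2 as a whole is not (element `n` is being written). -/
theorem frame (h : FloorsUpTo Blk mem f n) (hfc : stb_vorbis.floor_count mem' f = stb_vorbis.floor_count mem f)
    (hcfg : stb_vorbis.floor_config mem' f = stb_vorbis.floor_config mem f)
    (hcc : stb_vorbis.codebook_count mem' f = stb_vorbis.codebook_count mem f)
    (hft : ∀ i : Nat, i < n → stb_vorbis.floor_types mem' f i = stb_vorbis.floor_types mem f i)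
    (hk : ∀ i : Nat, i < n → (Block.mk (stb_vorbis.floor_config_at mem f i) Off.sizeof.Floor).Kept mem mem') :
    FloorsUpTo Blk mem' f n := by
  refine ⟨h.toFloorShape.frame hfc hcfg, ?_, ?_⟩
  · intro i hi
    rw [hft i hi]
    exact h.FL3 i hi
  · intro i hi
    have eg : stb_vorbis.floor_config_at mem' f i = stb_vorbis.floor_config_at mem f i := by
      simp only [stb_vorbis.floor_config_at]
      rw [hcfg]
    rw [eg, hcc]
    exact (h.floors i hi).frame (hk i hi)

/-- **The step of loop 3966**: at the end of iteration `n` (same memory), `floor_types[n] = 1` and FL4 … FL10 of element `n`. -/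
theorem step (h : FloorsUpTo Blk mem f n) (h3 : stb_vorbis.floor_types mem f n = 1)
    (hnew : Floor1OK mem (stb_vorbis.floor_config_at mem f n) (stb_vorbis.codebook_count mem f)) :
    FloorsUpTo Blk mem f (n + 1) := by
  refine ⟨h.toFloorShape, ?_, ?_⟩
  · intro i hi
    by_cases e : i = n
    · subst e
      exact h3
    · exact h.FL3 i (by omega)
  · intro i hi
    by_cases e : i = n
    · subst e
      exact hnew
    · exact h.floors i (by omega)

end FloorsUpTo

/-! ### 4. FY1: the `finalY` blocks -/

/-- **FY1** (group FinalYOK of the top-level invariant): every `f->finalY[c]`, `c < channels`, is the base of an allocated block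
of `sz` bytes with `2 * values ≤ sz` for the `values` of EVERY floor (∀-form: the actual size `2 * longest_floorlist` is a local
of start_decoder, not stored in `*f`, hence the existential size). Only the SHAPE: nothing is ever assumed about the contents of
`finalY` (FIX 11). -/
def FY1 (Blk : Block → Prop) (mem : Mem) (f : Nat) : Prop :=
  ∀ c : Nat, (c : Int) < stb_vorbis.channels mem f →
    ∃ sz : Nat, Blk ⟨stb_vorbis.finalY mem f c, sz⟩ ∧
      ∀ i : Nat, (i : Int) < stb_vorbis.floor_count mem f →
        2 * Floor1.values mem (stb_vorbis.floor_config_at mem f i) ≤ (sz : Int)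

/-- **The windows of `*f` that FY1 reads**: `channels` `[4, 8)`, `floor_count` `[176, 180)`, `floor_config` `[312, 320)`, the 16
pointers `finalY[16]` `[1264, 1392)`. -/
def FY1.wins : Wins := [(4, 8), (176, 180), (312, 320), (1264, 1392)]

/-- The numerals of `FY1.wins` are the generated offsets (a change of the layout fails here). -/
example : FY1.wins =
    [(Off.stb_vorbis.channels, Off.stb_vorbis.channels + 4), (Off.stb_vorbis.floor_count, Off.stb_vorbis.floor_count + 4),
      (Off.stb_vorbis.floor_config, Off.stb_vorbis.floor_config + 8),
      (Off.stb_vorbis.finalY, Off.stb_vorbis.finalY + Off.stb_vorbis.finalY.elem * Off.stb_vorbis.finalY.count)] := by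
  simp only [FY1.wins, voff]

/-- **The block whose CONTENT FY1 reads**: the block of FL2 (`values` of every floor). It is OWNED by the group FL1 … FL10
(`FloorsOK.owns_blk`), not by FY1. -/
inductive FY1.Reads (mem : Mem) (f : Nat) : Block → Prop
  /-- `Block(floor_config, 1596 * floor_count)` (FL2) -/
  | config : FY1.Reads mem f (floorBlock mem f)

/-- **The blocks the SHAPE clause FY1 mentions**: any block based at a `finalY[c]`, `c < channels`. The size is not a field of
`*f` (FY1 says "some `sz`"), so it is quantified here: `hB` of `transfer` says "an allocated block at `finalY[c]` stays
allocated". -/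
inductive FY1.Owns (mem : Mem) (f : Nat) : Block → Prop
  /-- a block at `finalY[c]`, `c < channels`, of any size -/
  | chan (c : Nat) (hc : (c : Int) < stb_vorbis.channels mem f) (sz : Nat) : FY1.Owns mem f ⟨stb_vorbis.finalY mem f c, sz⟩

namespace FY1
variable {Blk Blk' : Block → Prop} {Live : Nat → Prop} {mem mem' : Mem} {p f g a c : Nat}

/-- **USE**: `finalY[c][j]` for `j < values` of ANY floor `g` of `f` (load2 / store2). `j = 0, 1` (`values ≥ 2`),
`j = offset` (`Floor1OK.offset_lt`), `j = sorted_order[q]` (FL9), `j = low / high` (FL10), `j < values`. -/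
theorem site (hL : BlkLive Blk Live) (h : FY1 Blk mem f) (hc : (c : Int) < stb_vorbis.channels mem f)
    (hg : IsFloor mem f g) {j : Nat} (hj : (j : Int) < Floor1.values mem g)
    (ha : a = stb_vorbis.finalY mem f c + 2 * j) : Site Live a 2 := by
  obtain ⟨sz, hblk, hsz⟩ := h c hc
  obtain ⟨i, hi, rfl⟩ := hg
  have h2 := hsz i hi
  subst ha
  apply Site.of_blk hL hblk
  · exact Nat.le_add_right _ _
  · simp only []
    omega
  · omega

/-- The block itself, for a callee that takes `finalY` as an argument (do_floor): allocated, and big enough for floor `g`. -/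
theorem block (h : FY1 Blk mem f) (hc : (c : Int) < stb_vorbis.channels mem f) (hg : IsFloor mem f g) :
    ∃ sz : Nat, Blk ⟨stb_vorbis.finalY mem f c, sz⟩ ∧ 2 * Floor1.values mem g ≤ (sz : Int) := by
  obtain ⟨sz, hblk, hsz⟩ := h c hc
  obtain ⟨i, hi, rfl⟩ := hg
  exact ⟨sz, hblk, hsz i hi⟩

/-- **The owned block of channel `c` that IS allocated.** `FY1.Owns` quantifies the size, so "every owned block is allocated"
is false as it stands; what holds is: for every channel there is an owned block that is allocated. -/
theorem owns_blk (h : FY1 Blk mem f) (hc : (c : Int) < stb_vorbis.channels mem f) :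
    ∃ sz : Nat, FY1.Owns mem f ⟨stb_vorbis.finalY mem f c, sz⟩ ∧ Blk ⟨stb_vorbis.finalY mem f c, sz⟩ := by
  obtain ⟨sz, hblk, _⟩ := h c hc
  exact ⟨sz, FY1.Owns.chan c hc sz, hblk⟩

/-- **The two-address frame of FY1, field by field**: `channels`, the pointers `finalY[c]`, `floor_count`, `floor_config` of
the object at `f` in `mem'` have the values of the object at `p` in `mem`, `values` of every floor reads the same, and the blocks
at the `finalY[c]` are still allocated. (The CONTENTS of the finalY blocks are free to change.) The core of `transfer`. -/
theorem transfer_of_eq (h : FY1 Blk mem p) (hch : stb_vorbis.channels mem' f = stb_vorbis.channels mem p)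
    (hptr : ∀ c : Nat, (c : Int) < stb_vorbis.channels mem p → stb_vorbis.finalY mem' f c = stb_vorbis.finalY mem p c)
    (hfc : stb_vorbis.floor_count mem' f = stb_vorbis.floor_count mem p)
    (hcfg : stb_vorbis.floor_config mem' f = stb_vorbis.floor_config mem p)
    (hv : ∀ i : Nat, (i : Int) < stb_vorbis.floor_count mem p →
      Floor1.values mem' (stb_vorbis.floor_config_at mem p i) = Floor1.values mem (stb_vorbis.floor_config_at mem p i))
    (hB : ∀ B, FY1.Owns mem p B → Blk B → Blk' B) : FY1 Blk' mem' f := by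
  intro c hc
  rw [hch] at hc
  obtain ⟨sz, hblk, hsz⟩ := h c hc
  refine ⟨sz, ?_, ?_⟩
  · rw [hptr c hc]
    exact hB _ (FY1.Owns.chan c hc sz) hblk
  · intro i hi
    rw [hfc] at hi
    have eg : stb_vorbis.floor_config_at mem' f i = stb_vorbis.floor_config_at mem p i := by
      simp only [stb_vorbis.floor_config_at]
      rw [hcfg]
    rw [eg, hv i hi]
    exact hsz i hi

/-- **FRAME of FY1, field by field** (same address, same block predicate): the instance of `transfer_of_eq` a segment uses for a
store INTO `*f` whose effect it knows field by field. -/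
theorem frame_of_eq (h : FY1 Blk mem f) (hch : stb_vorbis.channels mem' f = stb_vorbis.channels mem f)
    (hptr : ∀ c : Nat, (c : Int) < stb_vorbis.channels mem f → stb_vorbis.finalY mem' f c = stb_vorbis.finalY mem f c)
    (hfc : stb_vorbis.floor_count mem' f = stb_vorbis.floor_count mem f)
    (hcfg : stb_vorbis.floor_config mem' f = stb_vorbis.floor_config mem f)
    (hv : ∀ i : Nat, (i : Int) < stb_vorbis.floor_count mem f →
      Floor1.values mem' (stb_vorbis.floor_config_at mem f i) = Floor1.values mem (stb_vorbis.floor_config_at mem f i)) :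
    FY1 Blk mem' f :=
  h.transfer_of_eq hch hptr hfc hcfg hv (fun _ _ hb => hb)

/-- **THE TWO-ADDRESS FRAME LEMMA of the group FY1** (Vorbis/Blocks.lean §5). EXTRA HYPOTHESES about the source state `(mem, p)`,
facts that other groups own: `hshape` = FL1 + FL2 (where the floors are: FY1 reads `values` of every floor, inside the block of
FL2, which the group FL1 … FL10 owns), and `hC` = `channels ≤ 16` (HD1: the pointers read are inside `finalY[16]`). -/
theorem transfer (h : FY1 Blk mem p) (hshape : FloorShape Blk mem p) (hC : stb_vorbis.channels mem p ≤ 16)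
    (he : ObjEq FY1.wins mem p mem' f) (hk : ∀ B, FY1.Reads mem p B → B.Kept mem mem')
    (hB : ∀ B, FY1.Owns mem p B → Blk B → Blk' B) : FY1 Blk' mem' f := by
  have hkept := hk _ FY1.Reads.config
  apply h.transfer_of_eq _ _ _ _ _ hB
  · simp only [vacc, voff]
    exact he.i32 4 (by decide)
  · intro c hc
    simp only [vacc, voff]
    rw [Nat.add_assoc f, Nat.add_assoc p]
    exact he.u64 (1264 + 8 * c) (InWins.of_mem (1264, 1392) (by decide) (by omega) (by omega))
  · simp only [vacc, voff]
    exact he.i32 176 (by decide)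
  · simp only [vacc, voff]
    exact he.u64 312 (by decide)
  · intro i hi
    have hg : IsFloor mem p (stb_vorbis.floor_config_at mem p i) := IsFloor.of_lt hi
    have hek := hshape.elem_kept hg hkept
    have hin := hek.inside
    simp only [] at hin
    exact Floor1.same_values hek.same hin

/-- **FRAME of FY1**, the usual form: same address, `*f` reads the same except the two arena offsets (`ObjSame`), the block of
FL2 is kept. `hshape`, `hC`: as in `transfer`. -/
theorem frame (h : FY1 Blk mem f) (hshape : FloorShape Blk mem f) (hC : stb_vorbis.channels mem f ≤ 16)
    (hs : ObjSame f mem mem') (hk : ∀ B, FY1.Reads mem f B → B.Kept mem mem') : FY1 Blk mem' f :=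
  h.transfer hshape hC (hs.sub (by decide)) hk (fun _ _ hb => hb)

/-- **Another block predicate** in which the blocks at the `finalY[c]` are still allocated; the memory is the same. -/
theorem reblk (h : FY1 Blk mem f) (hB : ∀ B, FY1.Owns mem f B → Blk B → Blk' B) : FY1 Blk' mem f := by
  intro c hc
  obtain ⟨sz, hblk, hsz⟩ := h c hc
  exact ⟨sz, hB _ (FY1.Owns.chan c hc sz) hblk, hsz⟩

/-- **ONE store of the walker** inside a block `C` disjoint from `*f` and from the block of FL2 (a store into a finalY block,
a channel buffer, the stack). For a store INTO `*f` use `transfer` with `ObjEq.of_writeLE`, or `frame_of_eq`. -/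
theorem store (h : FY1 Blk mem f) (hshape : FloorShape Blk mem f) (hok : BlkOK Blk) (hob : Blk (objBlock f)) {C : Block}
    (b k v : Nat) (hin : C.contains b k) (hdf : (objBlock f).disjoint C) (hdg : (floorBlock mem f).disjoint C)
    (hC : C.base + C.size ≤ 2 ^ 64) (h16 : stb_vorbis.channels mem f ≤ 16) : FY1 Blk (mem.writeLE (addr b) k v) f := by
  have hfin := stb_vorbis_inside hok hob
  have hsf : (objBlock f).Same mem (mem.writeLE (addr b) k v) := Block.Same.of_writeLE mem b k v hdf hin hC
  have hs : ObjSame f mem (mem.writeLE (addr b) k v) := ObjSame.of_same hsf (by omega)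
  apply h.frame hshape h16 hs
  intro B hR
  cases hR with
  | config => exact Block.Kept.of_writeLE mem b k v hdg hin hC (hok.no_wrap hshape.FL2)

end FY1

/-- **Transient of start_decoder's floor loop (4033)**: `L = longest_floorlist` (a stack slot) is at least `values` of every
floor below `n`. -/
def LongestOK (mem : Mem) (f n : Nat) (L : Int) : Prop :=
  ∀ i : Nat, i < n → Floor1.values mem (stb_vorbis.floor_config_at mem f i) ≤ L

/-- Before the loop (`longest_floorlist = 0`). -/
theorem LongestOK.zero (mem : Mem) (f : Nat) (L : Int) : LongestOK mem f 0 L :=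
  fun _ hi => absurd hi (Nat.not_lt_zero _)

/-- `if (g->values > longest_floorlist) longest_floorlist = g->values;` — any `L'` above the old `L` and the new `values`. -/
theorem LongestOK.step {mem : Mem} {f n : Nat} {L L' : Int} (h : LongestOK mem f n L) (hL : L ≤ L')
    (hv : Floor1.values mem (stb_vorbis.floor_config_at mem f n) ≤ L') : LongestOK mem f (n + 1) L' := by
  intro i hi
  by_cases e : i = n
  · subst e
    exact hv
  · have := h i (by omega)
    omega

/-- `LongestOK` over a store that keeps `values` of the floors below `n`. -/
theorem LongestOK.of_eq {mem mem' : Mem} {f n : Nat} {L : Int} (h : LongestOK mem f n L)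
    (hcfg : stb_vorbis.floor_config mem' f = stb_vorbis.floor_config mem f)
    (hv : ∀ i : Nat, i < n →
      Floor1.values mem' (stb_vorbis.floor_config_at mem f i) = Floor1.values mem (stb_vorbis.floor_config_at mem f i)) :
    LongestOK mem' f n L := by
  intro i hi
  have eg : stb_vorbis.floor_config_at mem' f i = stb_vorbis.floor_config_at mem f i := by
    simp only [stb_vorbis.floor_config_at]
    rw [hcfg]
  rw [eg, hv i hi]
  exact h i hi

/-- **Transient of the channel loop (4159–4163)**: `finalY[c]` is an allocated block of exactly `2 * L` bytes for the channels
below `n` (`f->finalY[i] = setup_malloc(f, sizeof(int16) * longest_floorlist)`, NULL-checked). -/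
def FYUpTo (Blk : Block → Prop) (mem : Mem) (f : Nat) (L : Int) (n : Nat) : Prop :=
  ∀ c : Nat, c < n → Blk ⟨stb_vorbis.finalY mem f c, 2 * L.toNat⟩

/-- Before the channel loop. -/
theorem FYUpTo.zero (Blk : Block → Prop) (mem : Mem) (f : Nat) (L : Int) : FYUpTo Blk mem f L 0 :=
  fun _ hc => absurd hc (Nat.not_lt_zero _)

/-- One more channel, in the same memory (after the pointer store and the NULL test). -/
theorem FYUpTo.step {Blk : Block → Prop} {mem : Mem} {f n : Nat} {L : Int} (h : FYUpTo Blk mem f L n)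
    (hnew : Blk ⟨stb_vorbis.finalY mem f n, 2 * L.toNat⟩) : FYUpTo Blk mem f L (n + 1) := by
  intro c hc
  by_cases e : c = n
  · subst e
    exact hnew
  · exact h c (by omega)

/-- `FYUpTo` over a store that keeps the pointers below `n`. -/
theorem FYUpTo.of_eq {Blk : Block → Prop} {mem mem' : Mem} {f n : Nat} {L : Int} (h : FYUpTo Blk mem f L n)
    (hptr : ∀ c : Nat, c < n → stb_vorbis.finalY mem' f c = stb_vorbis.finalY mem f c) : FYUpTo Blk mem' f L n := by
  intro c hc
  rw [hptr c hc]
  exact h c hc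

/-- `FYUpTo` in another block predicate in which the blocks below `n` are still allocated (the allocation of the next channel
added a block to the arena: `Arena.Blk.mono`). -/
theorem FYUpTo.reblk {Blk Blk' : Block → Prop} {mem : Mem} {f n : Nat} {L : Int} (h : FYUpTo Blk mem f L n)
    (hB : ∀ c : Nat, c < n → Blk ⟨stb_vorbis.finalY mem f c, 2 * L.toNat⟩ → Blk' ⟨stb_vorbis.finalY mem f c, 2 * L.toNat⟩) :
    FYUpTo Blk' mem f L n :=
  fun c hc => hB c hc (h c hc)

/-- **FY1 established** (SD.10): all channels allocated with `2 * longest_floorlist` bytes, `longest_floorlist ≥ values`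
of every floor. -/
theorem FY1.of_upTo {Blk : Block → Prop} {mem : Mem} {f n m : Nat} {L : Int} (hy : FYUpTo Blk mem f L n)
    (hn : stb_vorbis.channels mem f ≤ (n : Int)) (hL : LongestOK mem f m L)
    (hm : stb_vorbis.floor_count mem f ≤ (m : Int)) : FY1 Blk mem f := by
  intro c hc
  refine ⟨2 * L.toNat, hy c (by omega), ?_⟩
  intro i hi
  have := hL i (by omega)
  omega

/-! ### 5. The tables and stack arrays of the floor code

These USE lemmas are about GLOBALS (`range_list`, `inverse_db_table`) and STACK OBJECTS of the current frame (`step2_flag`, `p`,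
the channel buffer behind `output`). They are not blocks of the decoder invariant: the worker knows them live from the shadow
layer (`ShadowInv.live_other` for a global, `ShadowInv.live_frame` for an object of the protected frame; Vorbis/ObjBlock.lean),
so they take `(Block.mk R 16).live Live` directly and return a `Site` like every other USE lemma. (When the object IS an
allocated block — a channel buffer — `hL _ hB : B.live Live` with `hL : BlkLive Blk Live` gives the hypothesis.) -/

section Tables
variable {Live : Nat → Prop} {mem mem' : Mem} {a : Nat}

/-- **SH7 for `range_list`**: the four `int`s at `R` (G1: `0x120600`; `Vorbis.Globals.range_list`) are 256, 128, 86, 64. -/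
def RangeListOK (mem : Mem) (R : Nat) : Prop :=
  mem.i32 R = 256 ∧ mem.i32 (R + 4) = 128 ∧ mem.i32 (R + 8) = 86 ∧ mem.i32 (R + 12) = 64

/-- `range = range_list[mult - 1]` for `1 ≤ mult ≤ 4` (FL7): which value for which multiplier. (`ilog(range) - 1` is then
8, 7, 6, 6: the `n` of the two `get_bits` of lines 3240–3241.) -/
theorem RangeListOK.value {R m : Nat} (h : RangeListOK mem R) (hm : 1 ≤ m ∧ m ≤ 4) :
    (m = 1 ∧ mem.i32 (R + 4 * (m - 1)) = 256) ∨ (m = 2 ∧ mem.i32 (R + 4 * (m - 1)) = 128) ∨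
      (m = 3 ∧ mem.i32 (R + 4 * (m - 1)) = 86) ∨ (m = 4 ∧ mem.i32 (R + 4 * (m - 1)) = 64) := by
  obtain ⟨h0, h1, h2, h3⟩ := h
  have hcases : m = 1 ∨ m = 2 ∨ m = 3 ∨ m = 4 := by omega
  rcases hcases with e | e | e | e
  · subst e
    exact Or.inl ⟨rfl, h0⟩
  · subst e
    exact Or.inr (Or.inl ⟨rfl, h1⟩)
  · subst e
    exact Or.inr (Or.inr (Or.inl ⟨rfl, h2⟩))
  · subst e
    exact Or.inr (Or.inr (Or.inr ⟨rfl, h3⟩))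

/-- The range is one of the four constants: `64 ≤ range ≤ 256`. -/
theorem RangeListOK.bounds {R m : Nat} (h : RangeListOK mem R) (hm : 1 ≤ m ∧ m ≤ 4) :
    64 ≤ mem.i32 (R + 4 * (m - 1)) ∧ mem.i32 (R + 4 * (m - 1)) ≤ 256 := by
  have hv := h.value hm
  omega

/-- FRAME of SH7 for `range_list`: its 16 bytes read the same (no function's footprint contains image addresses). -/
theorem RangeListOK.frame {R : Nat} (h : RangeListOK mem R) (hs : (Block.mk R 16).Same mem mem') (hR : R + 16 ≤ 2 ^ 64) :
    RangeListOK mem' R := by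
  simp only [vblock] at hs
  obtain ⟨h0, h1, h2, h3⟩ := h
  refine ⟨?_, ?_, ?_, ?_⟩
  · rw [hs.i32 R (by omega) (by omega) hR]
    exact h0
  · rw [hs.i32 (R + 4) (by omega) (by omega) hR]
    exact h1
  · rw [hs.i32 (R + 8) (by omega) (by omega) hR]
    exact h2
  · rw [hs.i32 (R + 12) (by omega) (by omega) hR]
    exact h3

/-- **USE**: `range_list[mult - 1]` (load4), `1 ≤ mult ≤ 4` by FL7. `R` = the global's address, 4 `int`s = 16 bytes (SH5). -/
theorem site_range_list {R m : Nat} (hR : (Block.mk R 16).live Live) (hm : 1 ≤ m ∧ m ≤ 4) (ha : a = R + 4 * (m - 1)) :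
    Site Live a 4 := by
  subst ha
  exact Site.of_block hR (Nat.le_add_right _ _) (by simp only []; omega) (by omega)

/-- **USE**: `inverse_db_table[y & 255]` (load4) in draw_line (two sites) and do_floor (FIX 11): the index is a zero-extended
byte, so ANY `b < 256` is inside the 256 floats = 1024 bytes of the global at `T` (G1: `0x120680`, SH5). No fact about `y`. -/
theorem site_inverse_db {T b : Nat} (hT : (Block.mk T 1024).live Live) (hb : b < 256) (ha : a = T + 4 * b) :
    Site Live a 4 := by
  subst ha
  exact Site.of_block hT (Nat.le_add_right _ _) (by simp only []; omega) (by omega)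

/-- **USE**: `step2_flag[idx]` (load1 / store1), a 256-byte stack array of vorbis_decode_packet_rest (the frame object
`do_not_decode` (192, 256) of `Vorbis.Frames.vorbis_decode_packet_rest`: gcc shares the slot). Every index the code uses is a
zero-extended byte (`low`, `high`) or `j < values ≤ 250`. -/
theorem site_step2_flag {S idx : Nat} (hS : (Block.mk S 256).live Live) (hi : idx < 256) (ha : a = S + idx) :
    Site Live a 1 := by
  subst ha
  exact Site.of_block hS (Nat.le_add_right _ _) (by simp only []; omega) (by omega)

/-- The address of record `j` of start_decoder's stack array `stbv__floor_ordering p[250]` at `P`. -/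
def pAt (P j : Nat) : Nat := P + Off.sizeof.stbv__floor_ordering * j

/-- **USE**: `p[j].x` / `p[j].id` (load2 / store2), `j < 250` (`j < values`; `j + 1 ≤ values - 1` in the duplicate test). `P` =
the frame object `p` (208, 1000) of `Vorbis.Frames.start_decoder`. -/
theorem site_p {P j off : Nat} (hP : (Block.mk P 1000).live Live) (hj : j < 250)
    (ho : off = Off.stbv__floor_ordering.x ∨ off = Off.stbv__floor_ordering.id) (ha : a = pAt P j + off) : Site Live a 2 := by
  subst ha
  apply Site.of_block hP
  · simp only [pAt]
    omega
  · simp only [pAt, voff] at ho ⊢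
    omega
  · omega

/-- **USE**: `output[x]` of draw_line / `target[j]` of do_floor (load4; the store that follows has no check of its own):
`O` the live block that holds the `n` floats at `out`, `0 ≤ x < n` from `drawLine_index` / `floorTail_index`. -/
theorem site_output {O : Block} {out : Nat} {x n : Int} (hO : O.live Live) (hin : O.contains out (4 * n.toNat))
    (hx0 : 0 ≤ x) (hxn : x < n) (ha : a = out + 4 * x.toNat) : Site Live a 4 := by
  subst ha
  obtain ⟨h1, h2⟩ := hin
  exact Site.of_block hO (by omega) (by omega) (by omega)

end Tables


/-! ### 6. ESTABLISH: the transients inside one iteration of start_decoder's floor loop (INVARIANTS §6)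

One predicate per inner loop. Each comes with `.zero` (true before the loop), `.step` (one iteration), `.of_eq` (carried over
a store that keeps the accessors it reads) and the exit lemma that yields the clause of `Floor1OK`. The `.step` lemmas are
stated over ABSTRACT stores: `mem'` is the memory after the iteration's stores; what they ask is the equality of the old
entries (`mem.u8_writeLE …`, Vorbis/Fields/Core.lean §5) and the value of the new one (`mem.u8_writeLE_same …`). -/

section Transients
variable {mem mem' : Mem} {g : Nat} {cbc : Int}

/-! #### Loop 3985: `partition_class_list[j] = get_bits(f, 4)`, `max_class` -/

/-- **Invariant of loop 3985**: the classes of the partitions below `n` are `≤ 15` and `≤ mc` (`mc` = `max_class`, `-1` at the start). -/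
def PclUpTo (mem : Mem) (g n : Nat) (mc : Int) : Prop :=
  ∀ j : Nat, j < n → Floor1.partition_class_list mem g j ≤ 15 ∧ (Floor1.partition_class_list mem g j : Int) ≤ mc

/-- Before the loop: `j = 0`, `max_class = -1`. -/
theorem PclUpTo.zero (mem : Mem) (g : Nat) (mc : Int) : PclUpTo mem g 0 mc :=
  fun _ hj => absurd hj (Nat.not_lt_zero _)

/-- One iteration: the old entries are kept, the new one is a `get_bits(f, 4)` value, `max_class` is updated. -/
theorem PclUpTo.step {n : Nat} {mc mc' : Int} (h : PclUpTo mem g n mc)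
    (hold : ∀ j : Nat, j < n → Floor1.partition_class_list mem' g j = Floor1.partition_class_list mem g j)
    (hnew : Floor1.partition_class_list mem' g n ≤ 15) (hmc : mc ≤ mc')
    (hmc' : (Floor1.partition_class_list mem' g n : Int) ≤ mc') : PclUpTo mem' g (n + 1) mc' := by
  intro j hj
  by_cases e : j = n
  · subst e
    exact ⟨hnew, hmc'⟩
  · have h1 := h j (by omega)
    rw [hold j (by omega)]
    omega

/-- Carried over a store that keeps the entries below `n`. -/
theorem PclUpTo.of_eq {n : Nat} {mc : Int} (h : PclUpTo mem g n mc)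
    (hold : ∀ j : Nat, j < n → Floor1.partition_class_list mem' g j = Floor1.partition_class_list mem g j) :
    PclUpTo mem' g n mc := by
  intro j hj
  rw [hold j hj]
  exact h j hj

/-- The exit of loop 3985: FL5, and every class in use is `≤ max_class ≤ 15`. -/
theorem PclUpTo.class_le {n : Nat} {mc : Int} (h : PclUpTo mem g n mc) (hn : Floor1.partitions mem g ≤ n) {j : Nat}
    (hj : j < Floor1.partitions mem g) :
    Floor1.partition_class_list mem g j ≤ 15 ∧ (Floor1.partition_class_list mem g j : Int) ≤ mc :=
  h j (by omega)

/-! #### Loops 3990 / 3997: the class tables -/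

/-- **Invariant of loop 3997** (`for (k = 0; k < 1 << class_subclasses[c]; ++k)`): the subclass books below `n` of class `c`
are `-1` or a codebook index. -/
def BooksUpTo (mem : Mem) (g : Nat) (cbc : Int) (c n : Nat) : Prop :=
  ∀ k : Nat, k < n → -1 ≤ Floor1.subclass_books mem g c k ∧ Floor1.subclass_books mem g c k < cbc

/-- Before the loop. -/
theorem BooksUpTo.zero (mem : Mem) (g : Nat) (cbc : Int) (c : Nat) : BooksUpTo mem g cbc c 0 :=
  fun _ hk => absurd hk (Nat.not_lt_zero _)

/-- One iteration: `subclass_books[c][n] = (int16) get_bits(f, 8) - 1` (so `≥ -1`), tested `< codebook_count` (signed). -/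
theorem BooksUpTo.step {c n : Nat} (h : BooksUpTo mem g cbc c n)
    (hold : ∀ k : Nat, k < n → Floor1.subclass_books mem' g c k = Floor1.subclass_books mem g c k)
    (hnew : -1 ≤ Floor1.subclass_books mem' g c n ∧ Floor1.subclass_books mem' g c n < cbc) :
    BooksUpTo mem' g cbc c (n + 1) := by
  intro k hk
  by_cases e : k = n
  · subst e
    exact hnew
  · rw [hold k (by omega)]
    exact h k (by omega)

/-- The exit of loop 3997 and the three stores before it: FL6 for class `c`. -/
theorem ClassOK.of_books {c n : Nat} (hb : BooksUpTo mem g cbc c n)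
    (hn : 2 ^ Floor1.class_subclasses mem g c ≤ n)
    (hd : 1 ≤ Floor1.class_dimensions mem g c ∧ Floor1.class_dimensions mem g c ≤ 8)
    (hs : Floor1.class_subclasses mem g c ≤ 3)
    (hm : Floor1.class_subclasses mem g c ≠ 0 → (Floor1.class_masterbooks mem g c : Int) < cbc) : ClassOK mem g cbc c :=
  ⟨hd, hs, hm, fun k hk => hb k (by omega)⟩

/-- **Invariant of loop 3990** (`for (j = 0; j <= max_class; ++j)`): FL6 for every class below `n`. -/
def ClassesUpTo (mem : Mem) (g : Nat) (cbc : Int) (n : Nat) : Prop :=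
  ∀ c : Nat, c < n → ClassOK mem g cbc c

/-- Before the loop. -/
theorem ClassesUpTo.zero (mem : Mem) (g : Nat) (cbc : Int) : ClassesUpTo mem g cbc 0 :=
  fun _ hc => absurd hc (Nat.not_lt_zero _)

/-- One iteration, in the memory at its end: the classes below `n` were carried (`ClassesUpTo.of_eq`), class `n` is new. -/
theorem ClassesUpTo.step {n : Nat} (h : ClassesUpTo mem g cbc n) (hnew : ClassOK mem g cbc n) :
    ClassesUpTo mem g cbc (n + 1) := by
  intro c hc
  by_cases e : c = n
  · subst e
    exact hnew
  · exact h c (by omega)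

/-- Carried over a store that keeps the four table rows of the classes below `n` (a store into the row of class `n`, or
anywhere else). -/
theorem ClassesUpTo.of_eq {n : Nat} (h : ClassesUpTo mem g cbc n)
    (hd : ∀ c : Nat, c < n → Floor1.class_dimensions mem' g c = Floor1.class_dimensions mem g c)
    (hsb : ∀ c : Nat, c < n → Floor1.class_subclasses mem' g c = Floor1.class_subclasses mem g c)
    (hm : ∀ c : Nat, c < n → Floor1.class_masterbooks mem' g c = Floor1.class_masterbooks mem g c)
    (hb : ∀ c k : Nat, c < n → k < 8 → Floor1.subclass_books mem' g c k = Floor1.subclass_books mem g c k) :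
    ClassesUpTo mem' g cbc n := by
  intro c hc
  exact (h c hc).of_eq (hd c hc) (hsb c hc) (hm c hc) (fun k hk => hb c k hc hk)

/-- **The exit of loop 3990: FL6.** Every class in use is `≤ max_class < n`. -/
theorem ClassesUpTo.FL6 {n p : Nat} {mc : Int} (h : ClassesUpTo mem g cbc n) (hp : PclUpTo mem g p mc)
    (hpn : Floor1.partitions mem g ≤ p) (hmc : mc < (n : Int)) :
    ∀ j : Nat, j < Floor1.partitions mem g → ClassOK mem g cbc (Floor1.partition_class_list mem g j) := by
  intro j hj
  have h1 := hp j (by omega)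
  exact h _ (by omega)

/-! #### Lines 4003–4011: XL -/

/-- **XL up to `n`** (INVARIANTS §6): `rangebits ≤ 15`, `Xlist[0] = 0`, `Xlist[1] = 2 ^ rangebits`, and the entries
`2 ≤ j < n` are below `2 ^ rangebits` (each is a `get_bits(f, rangebits)`). The invariant of loops 4007 / 4009 with
`n = values`; carried unchanged through 4015, qsort, 4020, 4023 (nothing writes `Xlist`) to loop 4026. -/
structure XLUpTo (mem : Mem) (g n : Nat) : Prop where
  /-- `rangebits ≤ 15` (a `get_bits(f, 4)`) -/
  rb : Floor1.rangebits mem g ≤ 15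
  /-- `Xlist[0] = 0` -/
  x0 : Floor1.Xlist mem g 0 = 0
  /-- `Xlist[1] = 1 << rangebits` (fits `uint16`: `two_pow_le_32768`) -/
  x1 : Floor1.Xlist mem g 1 = 2 ^ Floor1.rangebits mem g
  /-- the later entries are below `Xlist[1]` -/
  lt : ∀ j : Nat, 2 ≤ j → j < n → Floor1.Xlist mem g j < 2 ^ Floor1.rangebits mem g

/-- **XL**: `XLUpTo` with `n = values`. -/
def XL (mem : Mem) (g : Nat) : Prop := XLUpTo mem g (Floor1.values mem g).toNat

/-- After the four stores of lines 4003–4006 (`values = 2`): nothing to say about later entries. -/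
theorem XLUpTo.two (hrb : Floor1.rangebits mem g ≤ 15) (h0 : Floor1.Xlist mem g 0 = 0)
    (h1 : Floor1.Xlist mem g 1 = 2 ^ Floor1.rangebits mem g) : XLUpTo mem g 2 :=
  ⟨hrb, h0, h1, fun _ h2 hj => absurd hj (by omega)⟩

/-- One iteration of loop 4009: `Xlist[n] = get_bits(f, rangebits)`, `n = values` before the increment. -/
theorem XLUpTo.step {n : Nat} (h : XLUpTo mem g n) (h2 : 2 ≤ n)
    (hrb : Floor1.rangebits mem' g = Floor1.rangebits mem g)
    (hold : ∀ j : Nat, j < n → Floor1.Xlist mem' g j = Floor1.Xlist mem g j)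
    (hnew : Floor1.Xlist mem' g n < 2 ^ Floor1.rangebits mem g) : XLUpTo mem' g (n + 1) := by
  refine ⟨?_, ?_, ?_, ?_⟩
  · rw [hrb]
    exact h.rb
  · rw [hold 0 (by omega)]
    exact h.x0
  · rw [hold 1 (by omega), hrb]
    exact h.x1
  · intro j hj2 hj
    rw [hrb]
    by_cases e : j = n
    · subst e
      exact hnew
    · rw [hold j (by omega)]
      exact h.lt j hj2 (by omega)

/-- Carried over a store that keeps `rangebits` and `Xlist[0 .. n)` (every store after loop 4009). -/
theorem XLUpTo.of_eq {n : Nat} (h : XLUpTo mem g n) (h2 : 2 ≤ n)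
    (hrb : Floor1.rangebits mem' g = Floor1.rangebits mem g)
    (hold : ∀ j : Nat, j < n → Floor1.Xlist mem' g j = Floor1.Xlist mem g j) : XLUpTo mem' g n := by
  refine ⟨?_, ?_, ?_, ?_⟩
  · rw [hrb]
    exact h.rb
  · rw [hold 0 (by omega)]
    exact h.x0
  · rw [hold 1 (by omega), hrb]
    exact h.x1
  · intro j hj2 hj
    rw [hrb, hold j hj]
    exact h.lt j hj2 hj

/-- Fewer entries. -/
theorem XLUpTo.mono {n n' : Nat} (h : XLUpTo mem g n) (hn : n' ≤ n) : XLUpTo mem g n' :=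
  ⟨h.rb, h.x0, h.x1, fun j h2 hj => h.lt j h2 (by omega)⟩

/-- The exit of loops 4007 / 4009. -/
theorem XL.of_upTo {n : Nat} (h : XLUpTo mem g n) (hn : Floor1.values mem g ≤ (n : Int)) : XL mem g :=
  h.mono (by omega)

/-- XL says that `Xlist[1]` is above every later entry below `values`. -/
theorem XL.lt_x1 (h : XL mem g) {j : Nat} (h2 : 2 ≤ j) (hj : (j : Int) < Floor1.values mem g) :
    Floor1.Xlist mem g j < Floor1.Xlist mem g 1 := by
  rw [h.x1]
  exact h.lt j h2 (by omega)

/-! #### Loop 4015, qsort, loop 4023: PID and FL9 -/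

/-- **Invariant of loop 4015** (`p[j].x = Xlist[j]; p[j].id = j`): the `id` of the records below `n`. (The `x` halves are not
needed: no sortedness is used anywhere.) -/
def PFill (mem : Mem) (P n : Nat) : Prop :=
  ∀ j : Nat, j < n → stbv__floor_ordering.id mem (pAt P j) = j

/-- Before the loop. -/
theorem PFill.zero (mem : Mem) (P : Nat) : PFill mem P 0 :=
  fun _ hj => absurd hj (Nat.not_lt_zero _)

/-- One iteration (both stores done). -/
theorem PFill.step {P n : Nat} (h : PFill mem P n)
    (hold : ∀ j : Nat, j < n → stbv__floor_ordering.id mem' (pAt P j) = stbv__floor_ordering.id mem (pAt P j))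
    (hnew : stbv__floor_ordering.id mem' (pAt P n) = n) : PFill mem' P (n + 1) := by
  intro j hj
  by_cases e : j = n
  · subst e
    exact hnew
  · rw [hold j (by omega)]
    exact h j (by omega)

/-- **PID** (INVARIANTS §6): every record of `p[0 .. values)` has an `id` below `values`. True after loop 4015, kept by
qsort's record-preservation, consumed by loop 4023. -/
def PID (mem : Mem) (g P : Nat) : Prop :=
  ∀ j : Nat, (j : Int) < Floor1.values mem g → (stbv__floor_ordering.id mem (pAt P j) : Int) < Floor1.values mem g

/-- The exit of loop 4015. -/
theorem PID.of_fill {P n : Nat} (h : PFill mem P n) (hn : Floor1.values mem g ≤ (n : Int)) : PID mem g P := by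
  intro j hj
  rw [h j (by omega)]
  exact hj

/-- **Record-preservation** (the post of `qsort`, `sift_down`, `swap_bytes`: DECISIONS D-6), byte level: every one of the `n`
records of `w` bytes at `base` in `mem'` equals some record of `mem`. No sortedness, not even that it is a permutation. -/
def RecordsPreserved (mem mem' : Mem) (base w n : Nat) : Prop :=
  ∀ k : Nat, k < n → ∃ k' : Nat, k' < n ∧ ∀ b : Nat, b < w → mem'.u8 (base + w * k + b) = mem.u8 (base + w * k' + b)

/-- Nothing moved. -/
theorem RecordsPreserved.refl (mem : Mem) (base w n : Nat) : RecordsPreserved mem mem base w n :=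
  fun k hk => ⟨k, hk, fun _ _ => rfl⟩

/-- Two rearrangements. -/
theorem RecordsPreserved.trans {mem'' : Mem} {base w n : Nat} (h1 : RecordsPreserved mem mem' base w n)
    (h2 : RecordsPreserved mem' mem'' base w n) : RecordsPreserved mem mem'' base w n := by
  intro k hk
  obtain ⟨k1, hk1, e1⟩ := h2 k hk
  obtain ⟨k2, hk2, e2⟩ := h1 k1 hk1
  exact ⟨k2, hk2, fun b hb => (e1 b hb).trans (e2 b hb)⟩

/-- A `uint16` is its two bytes. -/
theorem u16_eq_bytes (mem : Mem) (a : Nat) : mem.u16 a = mem.u8 a + 256 * mem.u8 (a + 1) := by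
  have e : addr (a + 1) = addr a + 1 := (addr_add_lit a 1).symm
  unfold Mem.u16 Mem.u8
  rw [e]
  simp only [Mem.readLE]
  omega

/-- The `id` of an output record is the `id` of some input record (`w = 4`: bytes 2, 3 of the record). -/
theorem RecordsPreserved.id_eq {P n : Nat} (h : RecordsPreserved mem mem' P Off.sizeof.stbv__floor_ordering n) {k : Nat}
    (hk : k < n) :
    ∃ k' : Nat, k' < n ∧ stbv__floor_ordering.id mem' (pAt P k) = stbv__floor_ordering.id mem (pAt P k') := by
  obtain ⟨k', hk', e⟩ := h k hk
  refine ⟨k', hk', ?_⟩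
  have e2 := e 2 (by simp only [voff]; omega)
  have e3 := e 3 (by simp only [voff]; omega)
  simp only [vacc, pAt, voff] at e2 e3 ⊢
  rw [u16_eq_bytes, u16_eq_bytes, e2]
  rw [Nat.add_assoc (P + 4 * k) 2 1, Nat.add_assoc (P + 4 * k') 2 1, e3]

/-- **PID across qsort**: `values` unchanged (qsort writes only `p`), the records of `p[0 .. values)` preserved. -/
theorem PID.of_records {P n : Nat} (h : PID mem g P) (hv : Floor1.values mem' g = Floor1.values mem g)
    (hn : (n : Int) = Floor1.values mem g) (hr : RecordsPreserved mem mem' P Off.sizeof.stbv__floor_ordering n) :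
    PID mem' g P := by
  intro j hj
  rw [hv] at hj ⊢
  obtain ⟨k', hk', e⟩ := hr.id_eq (k := j) (by omega)
  rw [e]
  exact h k' (by omega)

/-- Carried over a store that keeps `values` and the `id`s (the duplicate test 4020 stores nothing; stack spills). -/
theorem PID.of_eq {P : Nat} (h : PID mem g P) (hv : Floor1.values mem' g = Floor1.values mem g)
    (hid : ∀ j : Nat, (j : Int) < Floor1.values mem g →
      stbv__floor_ordering.id mem' (pAt P j) = stbv__floor_ordering.id mem (pAt P j)) : PID mem' g P := by
  intro j hj
  rw [hv] at hj ⊢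
  rw [hid j hj]
  exact h j hj

/-- The byte stored by `g->sorted_order[j] = (uint8) p[j].id` is the `id` itself (`values ≤ 250`), and below `values`. -/
theorem PID.byte {P j : Nat} (h : PID mem g P) (hj : (j : Int) < Floor1.values mem g) (hv : Floor1.values mem g ≤ 250) :
    stbv__floor_ordering.id mem (pAt P j) % 2 ^ 8 = stbv__floor_ordering.id mem (pAt P j) ∧
      (stbv__floor_ordering.id mem (pAt P j) : Int) < Floor1.values mem g := by
  have h1 := h j hj
  constructor
  · apply Nat.mod_eq_of_lt
    omega
  · exact h1

/-- **Invariant of loop 4023** (`sorted_order[j] = (uint8) p[j].id`): FL9 for the entries below `n`. -/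
def SortedUpTo (mem : Mem) (g n : Nat) : Prop :=
  ∀ q : Nat, q < n → (Floor1.sorted_order mem g q : Int) < Floor1.values mem g

/-- Before the loop. -/
theorem SortedUpTo.zero (mem : Mem) (g : Nat) : SortedUpTo mem g 0 :=
  fun _ hq => absurd hq (Nat.not_lt_zero _)

/-- One iteration: the new byte is `p[n].id`, below `values` by PID (`PID.byte`). -/
theorem SortedUpTo.step {n : Nat} (h : SortedUpTo mem g n) (hv : Floor1.values mem' g = Floor1.values mem g)
    (hold : ∀ q : Nat, q < n → Floor1.sorted_order mem' g q = Floor1.sorted_order mem g q)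
    (hnew : (Floor1.sorted_order mem' g n : Int) < Floor1.values mem g) : SortedUpTo mem' g (n + 1) := by
  intro q hq
  rw [hv]
  by_cases e : q = n
  · subst e
    exact hnew
  · rw [hold q (by omega)]
    exact h q (by omega)

/-- Carried over a store that keeps `values` and the entries below `n` (loop 4026 writes `neighbors` only). -/
theorem SortedUpTo.of_eq {n : Nat} (h : SortedUpTo mem g n) (hv : Floor1.values mem' g = Floor1.values mem g)
    (hold : ∀ q : Nat, q < n → Floor1.sorted_order mem' g q = Floor1.sorted_order mem g q) : SortedUpTo mem' g n := by
  intro q hq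
  rw [hv, hold q hq]
  exact h q hq

/-- **The exit of loop 4023: FL9.** -/
theorem SortedUpTo.FL9 {n : Nat} (h : SortedUpTo mem g n) (hn : Floor1.values mem g ≤ (n : Int)) :
    ∀ q : Nat, (q : Int) < Floor1.values mem g → (Floor1.sorted_order mem g q : Int) < Floor1.values mem g :=
  fun q hq => h q (by omega)

/-! #### Loop 4026: FL10 -/

/-- **Invariant of loop 4026** (`for (j = 2; j < values; ++j)`): FL10 for `2 ≤ j < n`. -/
def NbUpTo (mem : Mem) (g n : Nat) : Prop :=
  ∀ j : Nat, 2 ≤ j → j < n → NbOK mem g j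

/-- Before the loop (`j = 2`). -/
theorem NbUpTo.two (mem : Mem) (g : Nat) : NbUpTo mem g 2 :=
  fun _ h2 hj => absurd hj (by omega)

/-- **FL10 for `j` from the post of `neighbors(g->Xlist, j, &low, &hi)` and XL.** `low`, `hi` are the two dwords after the
call (both `0` before it); `mem'` is the memory after the two byte stores `neighbors[j][0] = low`, `neighbors[j][1] = hi`
(`% 2 ^ 8`: what `u8_writeLE_same` gives for the stored byte). The three hypotheses about `low` / `hi` are the contract of
`neighbors` (CONTRACTS §84) with "unchanged" read as "still 0". -/
theorem NbOK.of_post {n j low hi : Nat} (hxl : XLUpTo mem g n) (h2 : 2 ≤ j) (hjn : j < n) (hj250 : j < 250)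
    (hlow : (∃ i, i < j ∧ Floor1.Xlist mem g i < Floor1.Xlist mem g j) →
      low < j ∧ Floor1.Xlist mem g low < Floor1.Xlist mem g j)
    (hlow0 : ¬ (∃ i, i < j ∧ Floor1.Xlist mem g i < Floor1.Xlist mem g j) → low = 0)
    (hhi : (∃ i, i < j ∧ Floor1.Xlist mem g j < Floor1.Xlist mem g i) →
      hi < j ∧ Floor1.Xlist mem g j < Floor1.Xlist mem g hi)
    (hn0 : Floor1.neighbors mem' g j 0 = low % 2 ^ 8) (hn1 : Floor1.neighbors mem' g j 1 = hi % 2 ^ 8)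
    (hx : ∀ i : Nat, i ≤ j → Floor1.Xlist mem' g i = Floor1.Xlist mem g i) : NbOK mem' g j := by
  have hp := neighbors_post (fun i => Floor1.Xlist mem g i) j (2 ^ Floor1.rangebits mem g) low hi h2 hxl.x0 hxl.x1
    (hxl.lt j h2 hjn) hlow hlow0 hhi
  obtain ⟨hl, hh, hxl', hxh⟩ := hp
  have el : low % 2 ^ 8 = low := Nat.mod_eq_of_lt (by omega)
  have eh : hi % 2 ^ 8 = hi := Nat.mod_eq_of_lt (by omega)
  unfold NbOK
  rw [hn0, hn1, el, eh, hx low (by omega), hx hi (by omega), hx j (Nat.le_refl _)]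
  exact ⟨hl, hh, hxl', hxh⟩

/-- One iteration, in the memory at its end: the earlier `j` were carried (`NbUpTo.of_eq`), `n` is new (`NbOK.of_post`). -/
theorem NbUpTo.step {n : Nat} (h : NbUpTo mem g n) (hnew : NbOK mem g n) : NbUpTo mem g (n + 1) := by
  intro j h2 hj
  by_cases e : j = n
  · subst e
    exact hnew
  · exact h j h2 (by omega)

/-- Carried over a store that keeps `neighbors[2 .. n)` and `Xlist[0 .. n)` (the two byte stores of iteration `n`). -/
theorem NbUpTo.of_eq {n : Nat} (h : NbUpTo mem g n)
    (hnb : ∀ j k : Nat, j < n → k < 2 → Floor1.neighbors mem' g j k = Floor1.neighbors mem g j k)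
    (hx : ∀ i : Nat, i < n → Floor1.Xlist mem' g i = Floor1.Xlist mem g i) : NbUpTo mem' g n := by
  intro j h2 hj
  exact (h j h2 hj).of_eq (hnb j 0 hj (by omega)) (hnb j 1 hj (by omega)) (fun i hi => hx i (by omega))

/-- **The exit of loop 4026: FL10.** -/
theorem NbUpTo.FL10 {n : Nat} (h : NbUpTo mem g n) (hn : Floor1.values mem g ≤ (n : Int)) :
    ∀ j : Nat, 2 ≤ j → (j : Int) < Floor1.values mem g → NbOK mem g j :=
  fun j h2 hj => h j h2 (by omega)

/-! #### The end of the iteration: all seven clauses in one memory -/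

/-- **FL4 … FL10 of the new floor**, from the exits of the inner loops, all stated in the memory at the end of the iteration
(each transient is carried there by its `.of_eq`). `p` = the counter of loop 3985 at its exit, `n` = that of loop 3990. -/
theorem Floor1OK.of_transients {p n ns nn : Nat} {mc : Int} (h4 : Floor1.partitions mem g ≤ 31)
    (hpcl : PclUpTo mem g p mc) (hp : Floor1.partitions mem g ≤ p) (hcl : ClassesUpTo mem g cbc n) (hmc : mc < (n : Int))
    (h7 : 1 ≤ Floor1.floor1_multiplier mem g ∧ Floor1.floor1_multiplier mem g ≤ 4)
    (h8 : Floor1.values mem g = 2 + (Floor1.dimSum mem g (Floor1.partitions mem g) : Int))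
    (hso : SortedUpTo mem g ns) (hns : Floor1.values mem g ≤ (ns : Int))
    (hnb : NbUpTo mem g nn) (hnn : Floor1.values mem g ≤ (nn : Int)) : Floor1OK mem g cbc :=
  ⟨h4, fun _ hj => (hpcl.class_le hp hj).1, hcl.FL6 hpcl hp hmc, h7, h8, hso.FL9 hns, hnb.FL10 hnn⟩

end Transients

end Vorbis
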